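-- pv_equiv track=rewrite | github.com/ksumini/Algorithm-Study2.0 | Programmers/홀짝트리/yerin.py | solution
-- ===== SOURCE A (Python) =====
-- from collections import defaultdict
--
-- def generate_graph(edges):
--     graph = defaultdict(list)
--     for n1, n2 in edges:
--         graph[n1].append(n2)
--         graph[n2].append(n1)
--
--     return graph
--
-- def divide_by_group(groups, group_num, cur_node, graph, visited):
--     if len(graph[cur_node]) % 2 == 0:  # 자식 노드 개수: 짝수
--         if cur_node % 2 == 0:  # 현재 노드 정수가 짝수 -> 홀짝
--             groups[group_num][0].append(cur_node)
--         else:  # 역홀짝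
--             groups[group_num][1].append(cur_node)
--     else:  # 자식 노드 개수: 홀수
--         if cur_node % 2 == 0:  # 역홀짝
--             groups[group_num][1].append(cur_node)
--         else:  # 홀짝
--             groups[group_num][0].append(cur_node)
--     visited.add(cur_node)
--
--     for nxt_node in graph[cur_node]:
--         if nxt_node in visited:
--             continue
--         divide_by_group(groups, group_num, nxt_node, graph, visited)
--
--     return groups, visited
--
-- def solution(nodes, edges):
--     answer = [0, 0]
--
--     groups = defaultdict(lambda: [[],[]])  # [홀짝, 역홀짝]
--     visited = set()
--     graph = generate_graph(edges)
--     num = 0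
--
--     for node in nodes:
--         if node in visited:
--             continue
--
--         # 자식 노드가 없는 경우 (개수 0)
--         if node not in graph:
--             if node % 2 == 0:  # 홀짝
--                 answer[0] += 1
--             else:  # 역홀짝
--                 answer[1] += 1
--             continue
--
--         groups, visited = divide_by_group(groups, num, node, graph, visited)
--         num += 1  # 트리 그룹 넘버 갱신
--
--     for g1, g2 in groups.values():
--         # 트리마다 한 개의 노드만이 홀짝 또는 역홀짝일 때, 모든 트리가 같은 성질을 가짐
--         # 노드가 두 개, 각각 홀짝, 역홀짝일 경우 둘 다 루트 노드가 될 수 있음.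
--         if len(g1) == 1:
--             answer[0] += 1
--         if len(g2) == 1:
--             answer[1] += 1
--
--     return answer
-- ===== SOURCE B (Python) =====
-- def solution(nodes, edges):
--     # Union-find over edge endpoints instead of recursive DFS component discovery.
--     parent = {}
--     deg = {}
--
--     def find(x):
--         while parent[x] != x:
--             x = parent[x]
--         return x
--
--     for e in edges:
--         a, b = e
--         deg[a] = deg.get(a, 0) + 1
--         if a not in parent:
--             parent[a] = a
--         deg[b] = deg.get(b, 0) + 1
--         if b not in parent:
--             parent[b] = b
--         ra = find(a)
--         rb = find(b)
--         if ra != rb: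
--             parent[ra] = rb
--
--     answer = [0, 0]
--     used_roots = set()
--     for node in nodes:
--         if node not in deg:
--             if node % 2 == 0:
--                 answer[0] += 1
--             else:
--                 answer[1] += 1
--         else:
--             used_roots.add(find(node))
--
--     cnt = {}
--     for v in deg:
--         r = find(v)
--         if r in used_roots:
--             c = cnt.setdefault(r, [0, 0])
--             if deg[v] % 2 == v % 2:
--                 c[0] += 1
--             else:
--                 c[1] += 1
--
--     for c in cnt.values():
--         if c[0] == 1:
--             answer[0] += 1
--         if c[1] == 1:
--             answer[1] += 1
--
--     return answer
-- ===== Notes on version B (the rewrite author's own statement) =====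
-- stated objective: idiomatic
-- what changed: Replaces the recursive DFS component discovery (visited set + per-group node lists) with a union-find over edge endpoints plus a single grouping pass that keeps per-root counters instead of node lists.
import Mathlib
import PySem

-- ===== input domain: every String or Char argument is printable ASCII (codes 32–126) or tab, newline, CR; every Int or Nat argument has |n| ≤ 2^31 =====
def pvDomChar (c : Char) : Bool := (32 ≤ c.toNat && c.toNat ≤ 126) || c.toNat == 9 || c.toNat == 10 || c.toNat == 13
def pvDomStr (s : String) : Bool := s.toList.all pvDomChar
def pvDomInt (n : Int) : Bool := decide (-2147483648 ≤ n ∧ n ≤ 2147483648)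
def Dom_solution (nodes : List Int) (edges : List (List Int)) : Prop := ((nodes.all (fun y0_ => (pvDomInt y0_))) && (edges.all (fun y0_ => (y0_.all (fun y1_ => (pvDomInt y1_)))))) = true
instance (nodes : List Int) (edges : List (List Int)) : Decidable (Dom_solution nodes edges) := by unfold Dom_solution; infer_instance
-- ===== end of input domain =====

-- B replaces A's recursive DFS component discovery with a union-find over edge endpoints
-- and per-root counters (objective: idiomatic; equal return value on Pre_).


-- ===== PORT A =====

-- generate_graph: defaultdict(list), graph[n1].append(n2); graph[n2].append(n1).
-- Python raises ValueError unpacking an edge whose length ≠ 2 (excluded by Pre_); the port skips such an edge.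
def generateGraph (edges : List (List Int)) : PySem.Dict Int (List Int) :=
  edges.foldl (fun g e =>
    match e with
    | [n1, n2] =>
      let g := g.modify n1 [] (fun l => l ++ [n2])
      g.modify n2 [] (fun l => l ++ [n1])
    | _ => g) PySem.Dict.empty

-- divide_by_group, fuel-guarded structural recursion (the fuel passed by `solution`
-- is provably sufficient, so the 0-branch is never reached there).
mutual
def dfsA (graph : PySem.Dict Int (List Int)) (fuel : Nat)
    (groups : PySem.Dict Int (List Int × List Int)) (num : Int) (cur : Int)
    (visited : PySem.Set Int) : PySem.Dict Int (List Int × List Int) × PySem.Set Int :=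
  match fuel with
  | 0 => (groups, visited)
  | fuel' + 1 =>
    let groups :=
      if PySem.Int.mod ((graph.getD cur []).length : Int) 2 = 0 then
        if PySem.Int.mod cur 2 = 0 then
          groups.modify num ([], []) (fun pr => (pr.1 ++ [cur], pr.2))
        else
          groups.modify num ([], []) (fun pr => (pr.1, pr.2 ++ [cur]))
      else
        if PySem.Int.mod cur 2 = 0 then
          groups.modify num ([], []) (fun pr => (pr.1, pr.2 ++ [cur]))
        else
          groups.modify num ([], []) (fun pr => (pr.1 ++ [cur], pr.2))
    let visited := PySem.Set.add visited cur
    dfsListA graph fuel' groups num (graph.getD cur []) visited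
termination_by (fuel, 0)

def dfsListA (graph : PySem.Dict Int (List Int)) (fuel : Nat)
    (groups : PySem.Dict Int (List Int × List Int)) (num : Int) (ns : List Int)
    (visited : PySem.Set Int) : PySem.Dict Int (List Int × List Int) × PySem.Set Int :=
  match ns with
  | [] => (groups, visited)
  | n :: rest =>
    if PySem.Set.contains visited n then dfsListA graph fuel groups num rest visited
    else
      let r := dfsA graph fuel groups num n visited
      dfsListA graph fuel r.1 num rest r.2
termination_by (fuel, ns.length + 1)
end


def solution (nodes : List Int) (edges : List (List Int)) : List Int :=
  let graph := generateGraph edges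
  let fin := nodes.foldl
    (fun (st : (Int × Int) × PySem.Dict Int (List Int × List Int) × PySem.Set Int × Int) node =>
      let ans := st.1
      let groups := st.2.1
      let visited := st.2.2.1
      let num := st.2.2.2
      if PySem.Set.contains visited node then st
      else if graph.contains node = false then
        if PySem.Int.mod node 2 = 0 then ((ans.1 + 1, ans.2), groups, visited, num)
        else ((ans.1, ans.2 + 1), groups, visited, num)
      else
        let r := dfsA graph (2 * edges.length + 1) groups num node visited
        (ans, r.1, r.2, num + 1))
    ((0, 0), PySem.Dict.empty, PySem.Set.empty, 0)
  let ans := fin.2.1.values.foldl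
    (fun (a : Int × Int) g =>
      (a.1 + (if g.1.length = 1 then 1 else 0), a.2 + (if g.2.length = 1 then 1 else 0)))
    fin.1
  [ans.1, ans.2]

-- ===== PORT B =====

-- find(x): while parent[x] != x: x = parent[x].  Fuel-guarded; parent.size + 1 is
-- provably sufficient for the acyclic parent maps solution_alt builds.
def findB (parent : PySem.Dict Int Int) (fuel : Nat) (x : Int) : Int :=
  match fuel with
  | 0 => x
  | f + 1 =>
    let y := parent.getD x x   -- parent[x]; findB is only applied to keys of parent
    if y = x then x else findB parent f y

def solution_alt (nodes : List Int) (edges : List (List Int)) : List Int :=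
  let dp := edges.foldl
    (fun (st : PySem.Dict Int Int × PySem.Dict Int Int) e =>
      match e with
      | [a, b] =>
        let deg := st.1.insert a (st.1.getD a 0 + 1)
        let parent := if st.2.contains a then st.2 else st.2.insert a a
        let deg := deg.insert b (deg.getD b 0 + 1)
        let parent := if parent.contains b then parent else parent.insert b b
        let ra := findB parent (parent.size + 1) a
        let rb := findB parent (parent.size + 1) b
        if ra ≠ rb then (deg, parent.insert ra rb) else (deg, parent)
      | _ => st)   -- Python raises ValueError here (excluded by Pre_); the port skips the edge
    (PySem.Dict.empty, PySem.Dict.empty)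
  let deg := dp.1
  let parent := dp.2
  let st2 := nodes.foldl
    (fun (st : (Int × Int) × PySem.Set Int) node =>
      if deg.contains node = false then
        if PySem.Int.mod node 2 = 0 then ((st.1.1 + 1, st.1.2), st.2)
        else ((st.1.1, st.1.2 + 1), st.2)
      else (st.1, PySem.Set.add st.2 (findB parent (parent.size + 1) node)))
    ((0, 0), PySem.Set.empty)
  let usedRoots := st2.2
  let cnt := deg.keys.foldl
    (fun (cnt : PySem.Dict Int (Int × Int)) v =>
      let r := findB parent (parent.size + 1) v
      if PySem.Set.contains usedRoots r then
        let c := cnt.getD r (0, 0)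
        if PySem.Int.mod (deg.getD v 0) 2 = PySem.Int.mod v 2 then cnt.insert r (c.1 + 1, c.2)
        else cnt.insert r (c.1, c.2 + 1)
      else cnt)
    PySem.Dict.empty
  let ans := cnt.values.foldl
    (fun (a : Int × Int) c =>
      (a.1 + (if c.1 = 1 then 1 else 0), a.2 + (if c.2 = 1 then 1 else 0)))
    st2.1
  [ans.1, ans.2]

-- ===== PRECONDITION & SPEC =====

-- Pre_ excludes exactly the inputs where Python A raises: an edge that is not a 2-element
-- list makes `for n1, n2 in edges` raise ValueError (B's `a, b = e` raises there too).
def Pre_solution (nodes : List Int) (edges : List (List Int)) : Prop :=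
  ∀ e ∈ edges, e.length = 2
instance (nodes : List Int) (edges : List (List Int)) : Decidable (Pre_solution nodes edges) := by
  unfold Pre_solution; infer_instance

def pvWitness_solution : List Int × List (List Int) := ([0, 1, 2, 7], [[1, 2], [2, 4]])

def Spec_solution (nodes : List Int) (edges : List (List Int)) (out : List Int) : Prop := out = solution_alt nodes edges
instance (nodes : List Int) (edges : List (List Int)) (out : List Int) : Decidable (Spec_solution nodes edges out) := by unfold Spec_solution; infer_instance

-- ===== CLAIM (what is proved, stated in full; the proofs are below) =====
def Claim_equal_solution : Prop := ∀ (nodes : List Int) (edges : List (List Int)), Dom_solution nodes edges → Pre_solution nodes edges → Spec_solution nodes edges (solution nodes edges)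

-- ===== LEMMAS AND PROOFS =====

-- ---------- graph basics ----------

def toPairE : List Int → Option (Int × Int)
  | [a, b] => some (a, b)
  | _ => none

def Epairs (edges : List (List Int)) : List (Int × Int) := edges.filterMap toPairE

def Radj (edges : List (List Int)) (u v : Int) : Prop :=
  (u, v) ∈ Epairs edges ∨ (v, u) ∈ Epairs edges

def ReachE (edges : List (List Int)) : Int → Int → Prop :=
  Relation.ReflTransGen (Radj edges)

def Vl (edges : List (List Int)) : List Int :=
  (Epairs edges).flatMap (fun p => [p.1, p.2])

def degF (edges : List (List Int)) (u : Int) : Int := ((Vl edges).count u : Int)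

def clsF (edges : List (List Int)) (u : Int) : Bool :=
  PySem.Int.mod (degF edges u) 2 == PySem.Int.mod u 2

noncomputable def compE (edges : List (List Int)) (r : Int) : Finset Int :=
  @Finset.filter _ (fun u => ReachE edges r u) (Classical.decPred _) (Vl edges).toFinset

def c1E (edges : List (List Int)) (C : Finset Int) : Nat :=
  (C.filter (fun u => clsF edges u = true)).card
def c2E (edges : List (List Int)) (C : Finset Int) : Nat :=
  (C.filter (fun u => clsF edges u = false)).card

lemma radj_symm (edges : List (List Int)) {u v : Int} (h : Radj edges u v) : Radj edges v u :=
  h.elim .inr .inl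

lemma reach_symm (edges : List (List Int)) {u v : Int} (h : ReachE edges u v) :
    ReachE edges v u := by
  induction h with
  | refl => exact .refl
  | tail _ hstep ih => exact Relation.ReflTransGen.trans (Relation.ReflTransGen.single (radj_symm edges hstep)) ih

lemma radj_mem_left (edges : List (List Int)) {u v : Int} (h : Radj edges u v) : u ∈ Vl edges := by
  rcases h with h | h <;> exact List.mem_flatMap.2 ⟨_, h, by simp⟩

lemma radj_mem_right (edges : List (List Int)) {u v : Int} (h : Radj edges u v) : v ∈ Vl edges := by
  rcases h with h | h <;> exact List.mem_flatMap.2 ⟨_, h, by simp⟩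

lemma reach_mem (edges : List (List Int)) {u v : Int} (hu : u ∈ Vl edges)
    (h : ReachE edges u v) : v ∈ Vl edges := by
  induction h with
  | refl => exact hu
  | tail _ hstep _ => exact radj_mem_right edges hstep

lemma comp_eq_of_reach (edges : List (List Int)) {r s : Int} (h : ReachE edges r s) :
    compE edges r = compE edges s := by
  classical
  unfold compE
  rw [Finset.filter_congr_decidable, Finset.filter_congr_decidable]
  apply Finset.filter_congr
  intro u _
  constructor
  · intro hr; exact Relation.ReflTransGen.trans (reach_symm edges h) hr
  · intro hs; exact Relation.ReflTransGen.trans h hs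

lemma mem_comp_iff (edges : List (List Int)) {r u : Int} :
    u ∈ compE edges r ↔ u ∈ Vl edges ∧ ReachE edges r u := by
  classical
  unfold compE
  rw [Finset.filter_congr_decidable, Finset.mem_filter, List.mem_toFinset]

lemma mem_comp_self (edges : List (List Int)) {r : Int} (hr : r ∈ Vl edges) :
    r ∈ compE edges r := (mem_comp_iff edges).2 ⟨hr, .refl⟩

lemma comp_inj (edges : List (List Int)) {r s : Int} (hr : r ∈ Vl edges)
    (h : compE edges r = compE edges s) : ReachE edges s r := by
  have : r ∈ compE edges s := h ▸ mem_comp_self edges hr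
  exact ((mem_comp_iff edges).1 this).2

-- mod-2 facts
lemma mod2_cases (x : Int) : PySem.Int.mod x 2 = 0 ∨ PySem.Int.mod x 2 = 1 := by
  have h1 := PySem.Int.mod_nonneg x (b := 2) (by norm_num)
  have h2 := PySem.Int.mod_lt x (b := 2) (by norm_num)
  omega

-- ---------- adjacency of the generated graph ----------

def contribE (edges : List (List Int)) (u : Int) : List Int :=
  (Epairs edges).flatMap (fun p =>
    (if p.1 = u then [p.2] else []) ++ (if p.2 = u then [p.1] else []))

lemma contribE_cons_pair (a b : Int) (rest : List (List Int)) (u : Int) :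
    contribE ([a, b] :: rest) u =
      ((if u = a then [b] else []) ++ (if u = b then [a] else [])) ++ contribE rest u := by
  by_cases ha : u = a <;> by_cases hb : u = b <;>
    simp [contribE, Epairs, toPairE, ha, hb, eq_comm]

lemma contribE_cons_skip (e : List Int) (rest : List (List Int)) (u : Int)
    (h : toPairE e = none) : contribE (e :: rest) u = contribE rest u := by
  simp [contribE, Epairs, List.filterMap_cons, h]

lemma mem_Vl_cons_pair (a b : Int) (rest : List (List Int)) (u : Int) :
    u ∈ Vl ([a, b] :: rest) ↔ u = a ∨ u = b ∨ u ∈ Vl rest := by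
  simp [Vl, Epairs, toPairE]

lemma Vl_cons_skip (e : List Int) (rest : List (List Int)) (h : toPairE e = none) :
    Vl (e :: rest) = Vl rest := by
  simp [Vl, Epairs, List.filterMap_cons, h]

lemma generateGraph_getD (edges : List (List Int)) (g : PySem.Dict Int (List Int)) (u : Int) :
    (edges.foldl (fun g e =>
      match e with
      | [n1, n2] =>
        let g := g.modify n1 [] (fun l => l ++ [n2])
        g.modify n2 [] (fun l => l ++ [n1])
      | _ => g) g).getD u [] = g.getD u [] ++ contribE edges u := by
  induction edges generalizing g with
  | nil => simp [contribE, Epairs]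
  | cons e rest ih =>
    rcases e with _ | ⟨a, _ | ⟨b, _ | ⟨c, t⟩⟩⟩
    · rw [List.foldl_cons, ih, contribE_cons_skip _ _ _ rfl]
    · rw [List.foldl_cons, ih, contribE_cons_skip _ _ _ rfl]
    · rw [List.foldl_cons, ih, contribE_cons_pair]
      show ((g.modify a [] (fun l => l ++ [b])).modify b [] (fun l => l ++ [a])).getD u [] ++ _ = _
      rw [PySem.Dict.getD_modify, PySem.Dict.getD_modify, PySem.Dict.getD_modify]
      by_cases ha : u = a <;> by_cases hb : u = b <;> by_cases hab : a = b <;> simp_all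
    · rw [List.foldl_cons, ih, contribE_cons_skip _ _ _ rfl]

lemma generateGraph_contains (edges : List (List Int)) (g : PySem.Dict Int (List Int)) (u : Int) :
    (edges.foldl (fun g e =>
      match e with
      | [n1, n2] =>
        let g := g.modify n1 [] (fun l => l ++ [n2])
        g.modify n2 [] (fun l => l ++ [n1])
      | _ => g) g).contains u = (g.contains u || decide (u ∈ Vl edges)) := by
  induction edges generalizing g with
  | nil => simp [Vl, Epairs]
  | cons e rest ih =>
    rcases e with _ | ⟨a, _ | ⟨b, _ | ⟨c, t⟩⟩⟩
    · rw [List.foldl_cons, ih, Vl_cons_skip _ _ rfl]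
    · rw [List.foldl_cons, ih, Vl_cons_skip _ _ rfl]
    · rw [List.foldl_cons, ih]
      show (((g.modify a [] (fun l => l ++ [b])).modify b [] (fun l => l ++ [a])).contains u
        || decide (u ∈ Vl rest)) = _
      rw [PySem.Dict.contains_modify, PySem.Dict.contains_modify]
      by_cases ha : u = a <;> by_cases hb : u = b <;>
        by_cases hr : u ∈ Vl rest <;>
        simp_all [mem_Vl_cons_pair] <;>
        rw [show (u == b) = false from by simpa using hb,
            show (u == a) = false from by simpa using ha] <;> simp
    · rw [List.foldl_cons, ih, Vl_cons_skip _ _ rfl]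

lemma mem_contrib_iff (edges : List (List Int)) (u w : Int) :
    w ∈ contribE edges u ↔ Radj edges u w := by
  unfold contribE Radj
  rw [List.mem_flatMap]
  constructor
  · rintro ⟨p, hp, hw⟩
    rw [List.mem_append] at hw
    rcases hw with hw | hw <;> [skip; skip] <;>
    · split at hw <;> simp_all
      subst_vars
      first
        | exact Or.inl (by simpa using hp)
        | exact Or.inr (by simpa using hp)
  · rintro (h | h)
    · exact ⟨(u, w), h, by simp⟩
    · exact ⟨(w, u), h, by simp⟩

lemma length_contrib_aux (ps : List (Int × Int)) (u : Int) :
    (ps.flatMap (fun p =>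
      (if p.1 = u then [p.2] else []) ++ (if p.2 = u then [p.1] else []))).length =
    (ps.flatMap (fun p => [p.1, p.2])).count u := by
  induction ps with
  | nil => simp
  | cons p rest ih =>
    rcases p with ⟨a, b⟩
    simp only [List.flatMap_cons, List.length_append, List.count_append, ih]
    by_cases ha : a = u <;> by_cases hb : b = u <;>
      simp [ha, hb, List.count_cons, List.count_nil] <;> omega

lemma length_contrib (edges : List (List Int)) (u : Int) :
    ((contribE edges u).length : Int) = degF edges u := by
  unfold contribE degF Vl
  rw [length_contrib_aux]


-- ---------- dict modify lemmas ----------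

lemma dict_modify_modify {κ ν : Type} [BEq κ] [LawfulBEq κ] (d : PySem.Dict κ ν)
    (k : κ) (d0 : ν) (f g : ν → ν) :
    (d.modify k d0 f).modify k d0 g = d.modify k d0 (fun x => g (f x)) := by
  unfold PySem.Dict.modify
  rw [PySem.Dict.getD_insert_self, PySem.Dict.insert_insert_self]

lemma dict_modify_id {κ ν : Type} [BEq κ] [LawfulBEq κ] (d : PySem.Dict κ ν)
    (k : κ) (d0 : ν) (hc : d.contains k = true) (hn : d.keys.Nodup) :
    d.modify k d0 (fun x => x) = d := by
  unfold PySem.Dict.modify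
  apply PySem.Dict.ext
  rw [PySem.Dict.items_insert_of_contains _ _ hc]
  have : ∀ p ∈ d.items, (if p.1 == k then (k, d.getD k d0) else p) = p := by
    rintro ⟨k', v⟩ hp
    by_cases h : k' = k
    · subst h
      rw [PySem.Dict.getD_of_mem_items d hp hn]
      simp
    · simp [h]
  calc d.items.map (fun p => if p.1 == k then (k, d.getD k d0) else p)
      = d.items.map id := List.map_congr_left (by simpa using this)
    _ = d.items := List.map_id d.items

-- ---------- visited-set size ----------

def NVc (edges : List (List Int)) (visited : List Int) : Nat :=
  ((Vl edges).toFinset \ visited.toFinset).card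

lemma NVc_le_of_append (edges : List (List Int)) (v ext : List Int) :
    NVc edges (v ++ ext) ≤ NVc edges v := by
  apply Finset.card_le_card
  apply Finset.sdiff_subset_sdiff (Finset.Subset.refl _)
  intro x hx
  simp at hx ⊢
  exact Or.inl hx

lemma one_le_NVc (edges : List (List Int)) (v : List Int) {cur : Int}
    (hc : cur ∈ Vl edges) (hnv : cur ∉ v) : 1 ≤ NVc edges v := by
  have hmem : cur ∈ (Vl edges).toFinset \ v.toFinset := by
    simp [List.mem_toFinset, hc, hnv]
  exact Finset.card_pos.2 ⟨cur, hmem⟩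

lemma NVc_append_singleton (edges : List (List Int)) (v : List Int) {cur : Int}
    (hc : cur ∈ Vl edges) (hnv : cur ∉ v) :
    NVc edges (v ++ [cur]) + 1 = NVc edges v := by
  unfold NVc
  have h1 : (v ++ [cur]).toFinset = insert cur v.toFinset := by
    ext x; simp [List.mem_toFinset, or_comm]
  rw [h1]
  have h2 : (Vl edges).toFinset \ insert cur v.toFinset
      = ((Vl edges).toFinset \ v.toFinset).erase cur := by
    ext x; simp [Finset.mem_sdiff, Finset.mem_erase]; tauto
  rw [h2, Finset.card_erase_of_mem (by simp [List.mem_toFinset, hc, hnv])]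
  have : 1 ≤ ((Vl edges).toFinset \ v.toFinset).card :=
    one_le_NVc edges v hc hnv
  omega

-- ---------- classification ----------

lemma clsF_true_iff (edges : List (List Int)) (cur : Int) :
    clsF edges cur = true ↔
      (PySem.Int.mod (degF edges cur) 2 = 0 ↔ PySem.Int.mod cur 2 = 0) := by
  unfold clsF
  rcases mod2_cases (degF edges cur) with h1 | h1 <;> rcases mod2_cases cur with h2 | h2 <;>
    rw [h1, h2] <;> decide

-- ---------- the DFS characterization ----------

def dfsP1 (edges : List (List Int)) (fuel : Nat) : Prop :=
  ∀ (groups : PySem.Dict Int (List Int × List Int)) (num : Int) (cur : Int) (visited : List Int),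
    groups.keys.Nodup →
    cur ∈ Vl edges → cur ∉ visited → visited.Nodup →
    NVc edges visited ≤ fuel →
    ∃ L : List Int,
      dfsA (generateGraph edges) fuel groups num cur visited =
        (groups.modify num ([], []) (fun pr =>
          (pr.1 ++ L.filter (fun x => clsF edges x),
           pr.2 ++ L.filter (fun x => !clsF edges x))),
         visited ++ L) ∧
      L.Nodup ∧ (∀ x ∈ L, x ∉ visited) ∧ cur ∈ L ∧
      (∀ x ∈ L, x ∈ Vl edges ∧ ReachE edges cur x) ∧
      (∀ x ∈ L, ∀ w, Radj edges x w → w ∈ visited ++ L)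

def dfsP2 (edges : List (List Int)) (fuel : Nat) : Prop :=
  ∀ (groups : PySem.Dict Int (List Int × List Int)) (num : Int) (ns : List Int)
    (visited : List Int),
    groups.keys.Nodup → groups.contains num = true →
    (∀ n ∈ ns, n ∈ Vl edges) → visited.Nodup →
    NVc edges visited ≤ fuel →
    ∃ L : List Int,
      dfsListA (generateGraph edges) fuel groups num ns visited =
        (groups.modify num ([], []) (fun pr =>
          (pr.1 ++ L.filter (fun x => clsF edges x),
           pr.2 ++ L.filter (fun x => !clsF edges x))),
         visited ++ L) ∧
      L.Nodup ∧ (∀ x ∈ L, x ∉ visited) ∧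
      (∀ x ∈ L, x ∈ Vl edges ∧ ∃ n ∈ ns, ReachE edges n x) ∧
      (∀ x ∈ L, ∀ w, Radj edges x w → w ∈ visited ++ L) ∧
      (∀ n ∈ ns, n ∈ visited ++ L)

lemma graph_getD (edges : List (List Int)) (u : Int) :
    (generateGraph edges).getD u [] = contribE edges u := by
  unfold generateGraph
  rw [generateGraph_getD]
  simp [PySem.Dict.getD_empty]

lemma graph_contains (edges : List (List Int)) (u : Int) :
    (generateGraph edges).contains u = decide (u ∈ Vl edges) := by
  unfold generateGraph
  rw [generateGraph_contains]
  simp [PySem.Dict.contains_empty]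

lemma set_add_of_not_mem {x : Int} {s : List Int} (h : x ∉ s) :
    PySem.Set.add s x = s ++ [x] := by
  unfold PySem.Set.add
  rw [if_neg]
  simp [PySem.Set.contains_iff, h]

lemma dfsP1_zero (edges : List (List Int)) : dfsP1 edges 0 := by
  intro groups num cur visited _ hc hnv _ hfuel
  exact absurd (le_trans (one_le_NVc edges visited hc hnv) hfuel) (by omega)

lemma dfsP2_of_P1 (edges : List (List Int)) (fuel : Nat) (h1 : dfsP1 edges fuel) :
    dfsP2 edges fuel := by
  intro groups num ns visited
  induction ns generalizing groups visited with
  | nil =>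
    intro hk hcont hns hvn hfuel
    refine ⟨[], ?_, by simp, by simp, by simp, by simp, by simp⟩
    rw [dfsListA]
    have hfun : (fun pr : List Int × List Int =>
        (pr.1 ++ ([] : List Int).filter (fun x => clsF edges x),
         pr.2 ++ ([] : List Int).filter (fun x => !clsF edges x))) = (fun pr => pr) := by
      funext pr; simp
    rw [hfun, dict_modify_id groups num ([], []) hcont hk]
    simp
  | cons n rest ih =>
    intro hk hcont hns hvn hfuel
    by_cases hmem : n ∈ visited
    · have hc : PySem.Set.contains visited n = true := by
        simp [PySem.Set.contains_iff, hmem]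
      obtain ⟨L, hres, hnd, hdis, hval, hclo, hcov⟩ :=
        ih groups visited hk hcont (fun m hm => hns m (by simp [hm])) hvn hfuel
      refine ⟨L, ?_, hnd, hdis, ?_, hclo, ?_⟩
      · rw [dfsListA, if_pos hc]; exact hres
      · intro x hx
        obtain ⟨hv, m, hm, hr⟩ := hval x hx
        exact ⟨hv, m, by simp [hm], hr⟩
      · intro m hm
        rcases List.mem_cons.1 hm with h | h
        · subst h; simp [hmem]
        · exact hcov m h
    · obtain ⟨L1, hres1, hnd1, hdis1, hcur1, hreach1, hclo1⟩ :=
        h1 groups num n visited hk (hns n (by simp)) hmem hvn hfuel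
      have hk1 : (groups.modify num ([], []) (fun pr =>
          (pr.1 ++ L1.filter (fun x => clsF edges x),
           pr.2 ++ L1.filter (fun x => !clsF edges x)))).keys.Nodup := by
        unfold PySem.Dict.modify
        exact PySem.Dict.nodup_keys_insert _ _ _ hk
      have hcont1 : (groups.modify num ([], []) (fun pr =>
          (pr.1 ++ L1.filter (fun x => clsF edges x),
           pr.2 ++ L1.filter (fun x => !clsF edges x)))).contains num = true := by
        rw [PySem.Dict.contains_modify]
        simp
      have hvn1 : (visited ++ L1).Nodup :=
        List.Nodup.append hvn hnd1 (fun a ha hb => (hdis1 a hb) ha)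
      have hfuel1 : NVc edges (visited ++ L1) ≤ fuel :=
        le_trans (NVc_le_of_append edges visited L1) hfuel
      obtain ⟨L2, hres2, hnd2, hdis2, hval2, hclo2, hcov2⟩ :=
        ih _ (visited ++ L1) hk1 hcont1 (fun m hm => hns m (by simp [hm])) hvn1 hfuel1
      have hcn : ¬(PySem.Set.contains visited n = true) := by
        simp [PySem.Set.contains_iff, hmem]
      refine ⟨L1 ++ L2, ?_, ?_, ?_, ?_, ?_, ?_⟩
      · rw [dfsListA, if_neg hcn]
        show dfsListA _ _ (dfsA (generateGraph edges) fuel groups num n visited).1 _ rest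
          (dfsA (generateGraph edges) fuel groups num n visited).2 = _
        rw [hres1]
        show dfsListA _ _ _ _ rest (visited ++ L1) = _
        rw [hres2, dict_modify_modify]
        have hfun : (fun x : List Int × List Int =>
            ((x.1 ++ L1.filter (fun x => clsF edges x)) ++ L2.filter (fun x => clsF edges x),
             (x.2 ++ L1.filter (fun x => !clsF edges x)) ++ L2.filter (fun x => !clsF edges x))) =
            (fun pr : List Int × List Int =>
              (pr.1 ++ (L1 ++ L2).filter (fun x => clsF edges x),
               pr.2 ++ (L1 ++ L2).filter (fun x => !clsF edges x))) := by
          funext pr; simp [List.filter_append, List.append_assoc]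
        rw [hfun, List.append_assoc]
      · refine List.Nodup.append hnd1 hnd2 (fun a ha hb => ?_)
        exact (hdis2 a hb) (by simp [ha])
      · intro x hx
        rcases List.mem_append.1 hx with h | h
        · exact hdis1 x h
        · intro hv; exact (hdis2 x h) (by simp [hv])
      · intro x hx
        rcases List.mem_append.1 hx with h | h
        · exact ⟨(hreach1 x h).1, n, by simp, (hreach1 x h).2⟩
        · obtain ⟨hv, m, hm, hr⟩ := hval2 x h
          exact ⟨hv, m, by simp [hm], hr⟩
      · intro x hx w hw
        rcases List.mem_append.1 hx with h | h
        · have := hclo1 x h w hw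
          rw [List.mem_append] at this ⊢
          rcases this with h' | h'
          · exact Or.inl h'
          · exact Or.inr (by simp [h'])
        · have := hclo2 x h w hw
          simp only [List.append_assoc] at this
          exact this
      · intro m hm
        rcases List.mem_cons.1 hm with h | h
        · subst h; simp [hcur1]
        · have := hcov2 m h
          simp only [List.append_assoc] at this
          exact this

lemma dfsP1_succ (edges : List (List Int)) (fuel : Nat) (h2 : dfsP2 edges fuel) :
    dfsP1 edges (fuel + 1) := by
  intro groups num cur visited hk hc hnv hvn hfuel
  have hlen : ((((generateGraph edges).getD cur []).length : Int)) = degF edges cur := by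
    rw [graph_getD, length_contrib]
  have hadd : PySem.Set.add visited cur = visited ++ [cur] := set_add_of_not_mem hnv
  -- the classification step is `modify num` with the one-element list [cur]
  have hcls : (if PySem.Int.mod (((generateGraph edges).getD cur []).length : Int) 2 = 0 then
        if PySem.Int.mod cur 2 = 0 then
          groups.modify num ([], []) (fun pr => (pr.1 ++ [cur], pr.2))
        else
          groups.modify num ([], []) (fun pr => (pr.1, pr.2 ++ [cur]))
      else
        if PySem.Int.mod cur 2 = 0 then
          groups.modify num ([], []) (fun pr => (pr.1, pr.2 ++ [cur]))
        else
          groups.modify num ([], []) (fun pr => (pr.1 ++ [cur], pr.2))) =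
      groups.modify num ([], []) (fun pr =>
        (pr.1 ++ [cur].filter (fun x => clsF edges x),
         pr.2 ++ [cur].filter (fun x => !clsF edges x))) := by
    rw [hlen]
    by_cases h1 : PySem.Int.mod (degF edges cur) 2 = 0 <;>
      by_cases h2 : PySem.Int.mod cur 2 = 0
    · rw [if_pos h1, if_pos h2]
      have hcl : clsF edges cur = true := (clsF_true_iff edges cur).2 (by tauto)
      exact congrArg (fun f => groups.modify num ([], []) f)
        (funext fun pr => by simp [hcl])
    · rw [if_pos h1, if_neg h2]
      have hcl : clsF edges cur = false := by
        rcases Bool.eq_false_or_eq_true (clsF edges cur) with h | h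
        · exact absurd ((clsF_true_iff edges cur).1 h) (by tauto)
        · exact h
      exact congrArg (fun f => groups.modify num ([], []) f)
        (funext fun pr => by simp [hcl])
    · rw [if_neg h1, if_pos h2]
      have hcl : clsF edges cur = false := by
        rcases Bool.eq_false_or_eq_true (clsF edges cur) with h | h
        · exact absurd ((clsF_true_iff edges cur).1 h) (by tauto)
        · exact h
      exact congrArg (fun f => groups.modify num ([], []) f)
        (funext fun pr => by simp [hcl])
    · rw [if_neg h1, if_neg h2]
      have hcl : clsF edges cur = true := (clsF_true_iff edges cur).2 (by tauto)
      exact congrArg (fun f => groups.modify num ([], []) f)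
        (funext fun pr => by simp [hcl])
  set groups1 := groups.modify num ([], []) (fun pr =>
      (pr.1 ++ [cur].filter (fun x => clsF edges x),
       pr.2 ++ [cur].filter (fun x => !clsF edges x))) with hg1
  have hk1 : groups1.keys.Nodup := by
    rw [hg1]; unfold PySem.Dict.modify
    exact PySem.Dict.nodup_keys_insert _ _ _ hk
  have hcont1 : groups1.contains num = true := by
    rw [hg1, PySem.Dict.contains_modify]; simp
  have hns1 : ∀ n ∈ (generateGraph edges).getD cur [], n ∈ Vl edges := by
    intro n hn
    rw [graph_getD] at hn
    exact radj_mem_right edges ((mem_contrib_iff edges cur n).1 hn)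
  have hvn1 : (visited ++ [cur]).Nodup := by
    refine List.Nodup.append hvn (by simp) ?_
    intro a ha hb
    simp at hb; subst hb; exact hnv ha
  have hfuel1 : NVc edges (visited ++ [cur]) ≤ fuel := by
    have := NVc_append_singleton edges visited hc hnv
    omega
  obtain ⟨L2, hres2, hnd2, hdis2, hval2, hclo2, hcov2⟩ :=
    h2 groups1 num ((generateGraph edges).getD cur []) (visited ++ [cur])
      hk1 hcont1 hns1 hvn1 hfuel1
  refine ⟨cur :: L2, ?_, ?_, ?_, by simp, ?_, ?_⟩
  · rw [dfsA]
    show dfsListA _ fuel _ num ((generateGraph edges).getD cur [])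
        (PySem.Set.add visited cur) = _
    rw [hcls, hadd, hres2, dict_modify_modify]
    have hfun : (fun x : List Int × List Int =>
        ((x.1 ++ [cur].filter (fun x => clsF edges x)) ++ L2.filter (fun x => clsF edges x),
         (x.2 ++ [cur].filter (fun x => !clsF edges x)) ++ L2.filter (fun x => !clsF edges x))) =
        (fun pr : List Int × List Int =>
          (pr.1 ++ (cur :: L2).filter (fun x => clsF edges x),
           pr.2 ++ (cur :: L2).filter (fun x => !clsF edges x))) := by
      funext pr
      rcases Bool.eq_false_or_eq_true (clsF edges cur) with h | h <;>
        simp [List.filter_cons, h, List.append_assoc]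
    rw [hfun, List.append_assoc]
    rfl
  · refine List.Nodup.cons (fun h => ?_) hnd2
    exact (hdis2 cur h) (by simp)
  · intro x hx
    rcases List.mem_cons.1 hx with h | h
    · subst h; exact hnv
    · intro hv; exact (hdis2 x h) (by simp [hv])
  · intro x hx
    rcases List.mem_cons.1 hx with h | h
    · subst h; exact ⟨hc, .refl⟩
    · obtain ⟨hv, n, hn, hr⟩ := hval2 x h
      have hstep : Radj edges cur n := by
        rw [graph_getD] at hn
        exact (mem_contrib_iff edges cur n).1 hn
      exact ⟨hv, Relation.ReflTransGen.trans (Relation.ReflTransGen.single hstep) hr⟩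
  · intro x hx w hw
    rcases List.mem_cons.1 hx with h | h
    · rw [h] at hw
      have hwadj : w ∈ (generateGraph edges).getD cur [] := by
        rw [graph_getD]
        exact (mem_contrib_iff edges cur w).2 hw
      have := hcov2 w hwadj
      rw [List.mem_append] at this ⊢
      rcases this with h' | h'
      · rcases List.mem_append.1 h' with h'' | h''
        · exact Or.inl h''
        · simp at h''; subst h''; exact Or.inr (by simp)
      · exact Or.inr (by simp [h'])
    · have := hclo2 x h w hw
      rw [List.mem_append] at this ⊢
      rcases this with h' | h'
      · rcases List.mem_append.1 h' with h'' | h''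
        · exact Or.inl h''
        · simp at h''; subst h''; exact Or.inr (by simp)
      · exact Or.inr (by simp [h'])

lemma dfs_main (edges : List (List Int)) : ∀ fuel, dfsP1 edges fuel ∧ dfsP2 edges fuel := by
  intro fuel
  induction fuel with
  | zero => exact ⟨dfsP1_zero edges, dfsP2_of_P1 edges 0 (dfsP1_zero edges)⟩
  | succ f ih => exact ⟨dfsP1_succ edges f ih.2, dfsP2_of_P1 edges (f + 1) (dfsP1_succ edges f ih.2)⟩

-- ---------- union-find: parent-map theory ----------

def pstep (p : PySem.Dict Int Int) (x : Int) : Int := p.getD x x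

def iterP (p : PySem.Dict Int Int) : Nat → Int → Int
  | 0, x => x
  | n + 1, x => iterP p n (pstep p x)

def IsRootP (p : PySem.Dict Int Int) (r : Int) : Prop := pstep p r = r

def RootAbove (p : PySem.Dict Int Int) (v r : Int) : Prop :=
  ∃ n, iterP p n v = r ∧ IsRootP p r

lemma iterP_succ_back (p : PySem.Dict Int Int) (n : Nat) (x : Int) :
    iterP p (n + 1) x = pstep p (iterP p n x) := by
  induction n generalizing x with
  | zero => rfl
  | succ m ih => show iterP p (m + 1) (pstep p x) = _; rw [ih]; rfl

lemma iterP_add (p : PySem.Dict Int Int) (m n : Nat) (x : Int) :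
    iterP p (m + n) x = iterP p n (iterP p m x) := by
  induction n with
  | zero => rfl
  | succ k ih => rw [← Nat.add_assoc, iterP_succ_back, iterP_succ_back, ih]

lemma iterP_root_fix (p : PySem.Dict Int Int) {r : Int} (h : IsRootP p r) (n : Nat) :
    iterP p n r = r := by
  induction n with
  | zero => rfl
  | succ m ih => rw [iterP_succ_back, ih]; exact h

lemma rootAbove_minimal (p : PySem.Dict Int Int) {v r : Int} (h : RootAbove p v r) :
    ∃ n, iterP p n v = r ∧ IsRootP p r ∧ ∀ m < n, ¬ IsRootP p (iterP p m v) := by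
  obtain ⟨n, hn, hr⟩ := h
  have hQ : ∃ m, IsRootP p (iterP p m v) := ⟨n, by rw [hn]; exact hr⟩
  classical
  have hm0 : IsRootP p (iterP p (Nat.find hQ) v) := Nat.find_spec hQ
  have hmin : ∀ m < Nat.find hQ, ¬ IsRootP p (iterP p m v) := fun m hm => Nat.find_min hQ hm
  have hle : Nat.find hQ ≤ n := Nat.find_min' hQ (by rw [hn]; exact hr)
  have heq : iterP p n v = iterP p (Nat.find hQ) v := by
    conv_lhs => rw [show n = Nat.find hQ + (n - Nat.find hQ) by omega, iterP_add]
    exact iterP_root_fix p hm0 _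
  exact ⟨Nat.find hQ, by rw [← heq, hn], hr, hmin⟩

lemma chain_contains (p : PySem.Dict Int Int)
    (hclo : ∀ u, p.contains u = true → p.contains (pstep p u) = true)
    {v : Int} (hv : p.contains v = true) (n : Nat) : p.contains (iterP p n v) = true := by
  induction n with
  | zero => exact hv
  | succ m ih => rw [iterP_succ_back]; exact hclo _ ih

lemma chain_bound (p : PySem.Dict Int Int) (hk : p.keys.Nodup)
    (hclo : ∀ u, p.contains u = true → p.contains (pstep p u) = true)
    {v r : Int} (hv : p.contains v = true)
    {n : Nat} (hn : iterP p n v = r) (hr : IsRootP p r)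
    (hmin : ∀ m < n, ¬ IsRootP p (iterP p m v)) : n < p.size + 1 := by
  have hinj : ∀ i j, i < j → j ≤ n → iterP p i v ≠ iterP p j v := by
    intro i j hij hjn heq
    have h2 : iterP p n v = iterP p (n - j + i) v := by
      conv_lhs => rw [show n = j + (n - j) by omega, iterP_add]
      rw [← heq, ← iterP_add, show i + (n - j) = n - j + i by omega]
    have hroot' : IsRootP p (iterP p (n - j + i) v) := by rw [← h2, hn]; exact hr
    exact hmin (n - j + i) (by omega) hroot'
  have hmem : ∀ i : Nat, iterP p i v ∈ p.keys := fun i =>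
    (PySem.Dict.contains_iff_mem_keys _ _).1 (chain_contains p hclo hv i)
  have hinjOn : Set.InjOn (fun i => iterP p i v) (Finset.range (n + 1)) := by
    intro i hi j hj hij
    simp [Finset.mem_range] at hi hj
    by_contra hne
    rcases Nat.lt_or_ge i j with h | h
    · exact hinj i j h (by omega) hij
    · exact hinj j i (by omega) (by omega) hij.symm
  have hsub : (Finset.range (n + 1)).image (fun i => iterP p i v) ⊆ p.keys.toFinset := by
    intro x hx
    rw [Finset.mem_image] at hx
    obtain ⟨i, _, hi⟩ := hx
    rw [List.mem_toFinset, ← hi]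
    exact hmem i
  have hcard1 : ((Finset.range (n + 1)).image (fun i => iterP p i v)).card = n + 1 := by
    rw [Finset.card_image_of_injOn hinjOn, Finset.card_range]
  have hcard2 : p.keys.toFinset.card = p.keys.length := List.toFinset_card_of_nodup hk
  have hlen : p.keys.length = p.size := by simp [PySem.Dict.keys, PySem.Dict.size]
  have := Finset.card_le_card hsub
  omega

lemma findB_of_minimal (p : PySem.Dict Int Int) {v r : Int} {n fuel : Nat}
    (hfuel : n < fuel) (hn : iterP p n v = r) (hr : IsRootP p r)
    (hmin : ∀ m < n, ¬ IsRootP p (iterP p m v)) : findB p fuel v = r := by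
  induction fuel generalizing v n with
  | zero => omega
  | succ f ih =>
    rw [findB]
    show (if pstep p v = v then v else findB p f (pstep p v)) = r
    by_cases hroot : pstep p v = v
    · rw [if_pos hroot]
      have hn0 : n = 0 := by
        by_contra h
        exact hmin 0 (by omega) hroot
      rw [hn0] at hn
      exact hn
    · rw [if_neg hroot]
      have hn0 : n ≠ 0 := by
        intro h
        rw [h] at hn
        have hvr : v = r := hn
        rw [hvr] at hroot
        exact hroot hr
      have hstep : iterP p (n - 1) (pstep p v) = r := by
        have h2 : iterP p n v = iterP p (n - 1) (pstep p v) := by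
          conv_lhs => rw [show n = 1 + (n - 1) by omega, iterP_add]
          rfl
        rw [← h2, hn]
      have hmin' : ∀ m < n - 1, ¬ IsRootP p (iterP p m (pstep p v)) := by
        intro m hm
        exact hmin (m + 1) (by omega)
      exact ih (by omega) hstep hmin'

lemma findB_rootAbove (p : PySem.Dict Int Int) (hk : p.keys.Nodup)
    (hclo : ∀ u, p.contains u = true → p.contains (pstep p u) = true)
    {v r : Int} (hv : p.contains v = true) (h : RootAbove p v r) :
    findB p (p.size + 1) v = r := by
  obtain ⟨n, hn, hr, hmin⟩ := rootAbove_minimal p h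
  exact findB_of_minimal p (chain_bound p hk hclo hv hn hr hmin) hn hr hmin

-- ---------- union-find: preservation lemmas ----------

lemma pstep_insert (p : PySem.Dict Int Int) (k v x : Int) :
    pstep (p.insert k v) x = if x = k then v else pstep p x := by
  unfold pstep
  rw [PySem.Dict.getD_insert]

lemma contains_ne_of_false {p : PySem.Dict Int Int} {v a : Int}
    (hv : p.contains v = true) (hna : p.contains a = false) : v ≠ a := by
  intro h; rw [h] at hv; rw [hv] at hna; cases hna

lemma iterP_fresh (p : PySem.Dict Int Int) (a : Int) (hna : p.contains a = false)
    (hclo : ∀ u, p.contains u = true → p.contains (pstep p u) = true) :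
    ∀ n {v}, p.contains v = true → iterP (p.insert a a) n v = iterP p n v := by
  intro n
  induction n with
  | zero => intro v _; rfl
  | succ m ih =>
    intro v hv
    rw [iterP_succ_back, iterP_succ_back, ih hv, pstep_insert,
      if_neg (contains_ne_of_false (chain_contains p hclo hv m) hna)]

lemma rootAbove_fresh (p : PySem.Dict Int Int) (a : Int) (hna : p.contains a = false)
    (hclo : ∀ u, p.contains u = true → p.contains (pstep p u) = true)
    {v r : Int} (hv : p.contains v = true) (h : RootAbove p v r) :
    RootAbove (p.insert a a) v r := by
  obtain ⟨n, hn, hr⟩ := h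
  refine ⟨n, by rw [iterP_fresh p a hna hclo n hv, hn], ?_⟩
  have hrc : p.contains r = true := by
    rw [← hn]; exact chain_contains p hclo hv n
  unfold IsRootP
  rw [pstep_insert, if_neg (contains_ne_of_false hrc hna)]
  exact hr

lemma rootAbove_fresh_self (p : PySem.Dict Int Int) (a : Int) :
    RootAbove (p.insert a a) a a := by
  refine ⟨0, rfl, ?_⟩
  unfold IsRootP
  rw [pstep_insert, if_pos rfl]

lemma rootAbove_link (p : PySem.Dict Int Int) (ra rb : Int)
    (hra : IsRootP p ra) (hrb : IsRootP p rb) (hne : ra ≠ rb)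
    {v r : Int} (h : RootAbove p v r) :
    RootAbove (p.insert ra rb) v (if r = ra then rb else r) := by
  obtain ⟨n, hn, hr, hmin⟩ := rootAbove_minimal p h
  have hchain : ∀ i ≤ n, iterP (p.insert ra rb) i v = iterP p i v := by
    intro i hi
    induction i with
    | zero => rfl
    | succ j ih =>
      rw [iterP_succ_back, iterP_succ_back, ih (by omega), pstep_insert, if_neg]
      intro hja
      exact hmin j (by omega) (by rw [hja]; exact hra)
  by_cases hcase : r = ra
  · rw [if_pos hcase]
    refine ⟨n + 1, ?_, ?_⟩
    · rw [iterP_succ_back, hchain n le_rfl, hn, hcase, pstep_insert, if_pos rfl]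
    · unfold IsRootP
      rw [pstep_insert, if_neg (Ne.symm hne)]
      exact hrb
  · rw [if_neg hcase]
    refine ⟨n, by rw [hchain n le_rfl, hn], ?_⟩
    unfold IsRootP
    rw [pstep_insert, if_neg hcase]
    exact hr

lemma rootAbove_reach (edges : List (List Int)) (p : PySem.Dict Int Int)
    (hRe : ∀ v, p.contains v = true → p.contains (pstep p v) = true ∧ ReachE edges v (pstep p v))
    {v : Int} (hv : p.contains v = true) (n : Nat) : ReachE edges v (iterP p n v) := by
  induction n with
  | zero => exact .refl
  | succ m ih =>
    rw [iterP_succ_back]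
    exact Relation.ReflTransGen.trans ih
      (hRe (iterP p m v) (chain_contains p (fun u hu => (hRe u hu).1) hv m)).2

-- ---------- the edges fold of solution_alt ----------

def stepB (st : PySem.Dict Int Int × PySem.Dict Int Int) (e : List Int) :
    PySem.Dict Int Int × PySem.Dict Int Int :=
  match e with
  | [a, b] =>
    let deg := st.1.insert a (st.1.getD a 0 + 1)
    let parent := if st.2.contains a then st.2 else st.2.insert a a
    let deg := deg.insert b (deg.getD b 0 + 1)
    let parent := if parent.contains b then parent else parent.insert b b
    let ra := findB parent (parent.size + 1) a
    let rb := findB parent (parent.size + 1) b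
    if ra ≠ rb then (deg, parent.insert ra rb) else (deg, parent)
  | _ => st

def DPInv (edges proc : List (List Int)) (st : PySem.Dict Int Int × PySem.Dict Int Int) : Prop :=
  st.1.keys.Nodup ∧
  (∀ u : Int, st.1.contains u = true ↔ u ∈ Vl proc) ∧
  (∀ u : Int, st.1.getD u 0 = ((Vl proc).count u : Int)) ∧
  st.2.keys.Nodup ∧
  (∀ v : Int, st.2.contains v = true ↔ v ∈ Vl proc) ∧
  (∀ v : Int, st.2.contains v = true →
    st.2.contains (pstep st.2 v) = true ∧ ReachE edges v (pstep st.2 v)) ∧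
  (∀ v : Int, st.2.contains v = true → ∃ r, RootAbove st.2 v r) ∧
  (∀ q ∈ Epairs proc, ∃ r, RootAbove st.2 q.1 r ∧ RootAbove st.2 q.2 r)

lemma Vl_append (xs ys : List (List Int)) : Vl (xs ++ ys) = Vl xs ++ Vl ys := by
  simp [Vl, Epairs, List.filterMap_append]

lemma Epairs_append (xs ys : List (List Int)) :
    Epairs (xs ++ ys) = Epairs xs ++ Epairs ys := by
  simp [Epairs, List.filterMap_append]

lemma Vl_single_pair (a b : Int) : Vl [[a, b]] = [a, b] := by
  simp [Vl, Epairs, toPairE]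

lemma stage_setdefault (edges : List (List Int)) (p : PySem.Dict Int Int) (a : Int)
    (hk : p.keys.Nodup)
    (hcloRe : ∀ v, p.contains v = true → p.contains (pstep p v) = true ∧ ReachE edges v (pstep p v))
    (hroot : ∀ v, p.contains v = true → ∃ r, RootAbove p v r)
    (p1 : PySem.Dict Int Int) (hp1 : p1 = if p.contains a = true then p else p.insert a a) :
    p1.keys.Nodup ∧
    (∀ v, p1.contains v = true ↔ (p.contains v = true ∨ v = a)) ∧
    (∀ v, p1.contains v = true → p1.contains (pstep p1 v) = true ∧ ReachE edges v (pstep p1 v)) ∧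
    (∀ v, p1.contains v = true → ∃ r, RootAbove p1 v r) ∧
    (∀ v r, p.contains v = true → RootAbove p v r → RootAbove p1 v r) := by
  have hclo : ∀ u, p.contains u = true → p.contains (pstep p u) = true :=
    fun u hu => (hcloRe u hu).1
  by_cases hca : p.contains a = true
  · rw [if_pos hca] at hp1
    subst hp1
    refine ⟨hk, ?_, hcloRe, hroot, fun v r _ h => h⟩
    intro v
    constructor
    · exact fun h => Or.inl h
    · rintro (h | h)
      · exact h
      · rw [h]; exact hca
  · rw [if_neg hca] at hp1
    have hca' : p.contains a = false := by
      rcases Bool.eq_false_or_eq_true (p.contains a) with h | h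
      · exact absurd h hca
      · exact h
    subst hp1
    have hmem : ∀ v, (p.insert a a).contains v = true ↔ (p.contains v = true ∨ v = a) := by
      intro v
      rw [PySem.Dict.contains_insert]
      simp [or_comm]
    refine ⟨PySem.Dict.nodup_keys_insert _ _ _ hk, hmem, ?_, ?_, ?_⟩
    · intro v hv
      rcases (hmem v).1 hv with hv' | hv'
      · have hne : v ≠ a := contains_ne_of_false hv' hca'
        rw [pstep_insert, if_neg hne]
        exact ⟨(hmem _).2 (Or.inl (hcloRe v hv').1), (hcloRe v hv').2⟩
      · rw [hv']
        rw [pstep_insert, if_pos rfl]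
        exact ⟨(hmem _).2 (Or.inr rfl), .refl⟩
    · intro v hv
      rcases (hmem v).1 hv with hv' | hv'
      · obtain ⟨r, hr⟩ := hroot v hv'
        exact ⟨r, rootAbove_fresh p a hca' hclo hv' hr⟩
      · rw [hv']; exact ⟨a, rootAbove_fresh_self p a⟩
    · intro v r hv hr
      exact rootAbove_fresh p a hca' hclo hv hr

lemma stage_link (edges : List (List Int)) (p : PySem.Dict Int Int) (ra rb : Int)
    (hk : p.keys.Nodup)
    (hcloRe : ∀ v, p.contains v = true → p.contains (pstep p v) = true ∧ ReachE edges v (pstep p v))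
    (hroot : ∀ v, p.contains v = true → ∃ r, RootAbove p v r)
    (hcra : p.contains ra = true) (hcrb : p.contains rb = true)
    (hra : IsRootP p ra) (hrb : IsRootP p rb) (hne : ra ≠ rb) (hreach : ReachE edges ra rb) :
    (p.insert ra rb).keys.Nodup ∧
    (∀ v, (p.insert ra rb).contains v = true ↔ p.contains v = true) ∧
    (∀ v, (p.insert ra rb).contains v = true →
      (p.insert ra rb).contains (pstep (p.insert ra rb) v) = true ∧
      ReachE edges v (pstep (p.insert ra rb) v)) ∧
    (∀ v, (p.insert ra rb).contains v = true → ∃ r, RootAbove (p.insert ra rb) v r) ∧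
    (∀ v r, RootAbove p v r → RootAbove (p.insert ra rb) v (if r = ra then rb else r)) := by
  have hkeys : (p.insert ra rb).keys = p.keys := PySem.Dict.keys_insert_of_contains _ _ hcra
  have hmem : ∀ v, (p.insert ra rb).contains v = true ↔ p.contains v = true := by
    intro v
    rw [PySem.Dict.contains_insert]
    constructor
    · intro h
      rcases Bool.or_eq_true_iff.1 h with h' | h'
      · rw [eq_of_beq h']; exact hcra
      · exact h'
    · intro h; simp [h]
  refine ⟨by rw [hkeys]; exact hk, hmem, ?_, ?_, fun v r hr => rootAbove_link p ra rb hra hrb hne hr⟩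
  · intro v hv
    by_cases hvra : v = ra
    · rw [hvra, pstep_insert, if_pos rfl]
      exact ⟨(hmem _).2 hcrb, hreach⟩
    · rw [pstep_insert, if_neg hvra]
      have hv' := (hmem v).1 hv
      exact ⟨(hmem _).2 (hcloRe v hv').1, (hcloRe v hv').2⟩
  · intro v hv
    obtain ⟨r, hr⟩ := hroot v ((hmem v).1 hv)
    exact ⟨_, rootAbove_link p ra rb hra hrb hne hr⟩

lemma dp_step (edges proc : List (List Int)) (st : PySem.Dict Int Int × PySem.Dict Int Int)
    (e : List Int) (he : e ∈ edges) (h : DPInv edges proc st) :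
    DPInv edges (proc ++ [e]) (stepB st e) := by
  obtain ⟨h1, h2, h3, h4, h5, h6, h7, h8⟩ := h
  have hskip : ∀ (hnp : toPairE e = none), DPInv edges (proc ++ [e]) st := by
    intro hnp
    have hV : Vl (proc ++ [e]) = Vl proc := by
      rw [Vl_append]
      simp [Vl, Epairs, List.filterMap_cons, hnp]
    have hE : Epairs (proc ++ [e]) = Epairs proc := by
      rw [Epairs_append]
      simp [Epairs, List.filterMap_cons, hnp]
    rw [DPInv, hV, hE]
    exact ⟨h1, h2, h3, h4, h5, h6, h7, h8⟩
  rcases e with _ | ⟨a, _ | ⟨b, _ | ⟨c, t⟩⟩⟩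
  · exact hskip rfl
  · exact hskip rfl
  · -- e = [a, b]
    have hV : Vl (proc ++ [[a, b]]) = Vl proc ++ [a, b] := by
      rw [Vl_append, Vl_single_pair]
    have hE : Epairs (proc ++ [[a, b]]) = Epairs proc ++ [(a, b)] := by
      rw [Epairs_append]; simp [Epairs, toPairE]
    have hRadj : Radj edges a b := by
      left
      exact List.mem_filterMap.2 ⟨[a, b], he, rfl⟩
    -- deg side
    have hdk : ((st.1.insert a (st.1.getD a 0 + 1)).insert b
        ((st.1.insert a (st.1.getD a 0 + 1)).getD b 0 + 1)).keys.Nodup :=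
      PySem.Dict.nodup_keys_insert _ _ _ (PySem.Dict.nodup_keys_insert _ _ _ h1)
    have hdc : ∀ u : Int, ((st.1.insert a (st.1.getD a 0 + 1)).insert b
        ((st.1.insert a (st.1.getD a 0 + 1)).getD b 0 + 1)).contains u = true ↔
        u ∈ Vl (proc ++ [[a, b]]) := by
      intro u
      rw [hV, PySem.Dict.contains_insert, PySem.Dict.contains_insert]
      simp [h2 u, or_comm, or_assoc]
      tauto
    have hdg : ∀ u : Int, ((st.1.insert a (st.1.getD a 0 + 1)).insert b
        ((st.1.insert a (st.1.getD a 0 + 1)).getD b 0 + 1)).getD u 0 =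
        (((Vl (proc ++ [[a, b]])).count u : Nat) : Int) := by
      intro u
      rw [hV, PySem.Dict.getD_insert, PySem.Dict.getD_insert, PySem.Dict.getD_insert,
        List.count_append]
      have hc2 : List.count u [a, b] = (if u = a then 1 else 0) + (if u = b then 1 else 0) := by
        simp only [List.count_cons, List.count_nil, beq_iff_eq]
        split_ifs <;> omega
      rw [hc2]
      push_cast
      split_ifs <;> simp_all [h3] <;> push_cast <;> omega
    -- parent side: stage 1 (setdefault a)
    obtain ⟨k1, m1, c1, r1, t1⟩ := stage_setdefault edges st.2 a h4 h6 h7 _ rfl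
    -- stage 2 (setdefault b)
    obtain ⟨k2, m2, c2, r2, t2⟩ := stage_setdefault edges _ b k1 c1 r1 _ rfl
    set p2 := (if (if st.2.contains a = true then st.2 else st.2.insert a a).contains b = true
      then (if st.2.contains a = true then st.2 else st.2.insert a a)
      else (if st.2.contains a = true then st.2 else st.2.insert a a).insert b b) with hp2def
    have hclo2 : ∀ u, p2.contains u = true → p2.contains (pstep p2 u) = true :=
      fun u hu => (c2 u hu).1
    have hpa : p2.contains a = true := (m2 a).2 (Or.inl ((m1 a).2 (Or.inr rfl)))
    have hpb : p2.contains b = true := (m2 b).2 (Or.inr rfl)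
    have hmem2 : ∀ v, p2.contains v = true ↔ (v ∈ Vl proc ∨ v = a ∨ v = b) := by
      intro v
      rw [m2, m1, h5]
      tauto
    obtain ⟨ra, hra⟩ := r2 a hpa
    obtain ⟨rb, hrb⟩ := r2 b hpb
    have hfa : findB p2 (p2.size + 1) a = ra := findB_rootAbove p2 k2 hclo2 hpa hra
    have hfb : findB p2 (p2.size + 1) b = rb := findB_rootAbove p2 k2 hclo2 hpb hrb
    have hcra : p2.contains ra = true := by
      obtain ⟨n, hn, _⟩ := hra
      rw [← hn]; exact chain_contains p2 hclo2 hpa n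
    have hcrb : p2.contains rb = true := by
      obtain ⟨n, hn, _⟩ := hrb
      rw [← hn]; exact chain_contains p2 hclo2 hpb n
    have hreach_a_ra : ReachE edges a ra := by
      obtain ⟨n, hn, _⟩ := hra
      rw [← hn]; exact rootAbove_reach edges p2 c2 hpa n
    have hreach_b_rb : ReachE edges b rb := by
      obtain ⟨n, hn, _⟩ := hrb
      rw [← hn]; exact rootAbove_reach edges p2 c2 hpb n
    have hstep : stepB st [a, b] =
        (if findB p2 (p2.size + 1) a ≠ findB p2 (p2.size + 1) b
         then ((st.1.insert a (st.1.getD a 0 + 1)).insert b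
            ((st.1.insert a (st.1.getD a 0 + 1)).getD b 0 + 1), p2.insert (findB p2 (p2.size + 1) a) (findB p2 (p2.size + 1) b))
         else ((st.1.insert a (st.1.getD a 0 + 1)).insert b
            ((st.1.insert a (st.1.getD a 0 + 1)).getD b 0 + 1), p2)) := rfl
    by_cases hne : ra = rb
    · -- no link
      have : stepB st [a, b] = ((st.1.insert a (st.1.getD a 0 + 1)).insert b
            ((st.1.insert a (st.1.getD a 0 + 1)).getD b 0 + 1), p2) := by
        rw [hstep, hfa, hfb, if_neg (by simp [hne])]
      rw [this]
      refine ⟨hdk, hdc, hdg, k2, ?_, c2, r2, ?_⟩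
      · intro v; rw [hmem2, hV]; simp [or_assoc]
      · rw [hE]
        intro q hq
        rcases List.mem_append.1 hq with hq | hq
        · obtain ⟨r, hr1, hr2⟩ := h8 q hq
          have hqc1 : st.2.contains q.1 = true := (h5 q.1).2 (radj_mem_left proc (Or.inl hq))
          have hqc2 : st.2.contains q.2 = true := (h5 q.2).2 (radj_mem_right proc (Or.inl hq))
          exact ⟨r, t2 q.1 r ((m1 q.1).2 (Or.inl hqc1)) (t1 q.1 r hqc1 hr1),
                 t2 q.2 r ((m1 q.2).2 (Or.inl hqc2)) (t1 q.2 r hqc2 hr2)⟩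
        · simp at hq
          rw [hq]
          exact ⟨ra, hra, hne ▸ hrb⟩
    · -- link ra → rb
      have hreach_ra_rb : ReachE edges ra rb :=
        Relation.ReflTransGen.trans (reach_symm edges hreach_a_ra)
          (Relation.ReflTransGen.trans (Relation.ReflTransGen.single hRadj) hreach_b_rb)
      have hraR : IsRootP p2 ra := by obtain ⟨n, _, hr⟩ := hra; exact hr
      have hrbR : IsRootP p2 rb := by obtain ⟨n, _, hr⟩ := hrb; exact hr
      obtain ⟨kL, mL, cL, rL, tL⟩ := stage_link edges p2 ra rb k2 c2 r2 hcra hcrb hraR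
        hrbR hne hreach_ra_rb
      have hres : stepB st [a, b] = ((st.1.insert a (st.1.getD a 0 + 1)).insert b
            ((st.1.insert a (st.1.getD a 0 + 1)).getD b 0 + 1), p2.insert ra rb) := by
        rw [hstep, hfa, hfb, if_pos hne]
      rw [hres]
      refine ⟨hdk, hdc, hdg, kL, ?_, cL, rL, ?_⟩
      · intro v; rw [mL, hmem2, hV]; simp [or_assoc]
      · rw [hE]
        intro q hq
        rcases List.mem_append.1 hq with hq | hq
        · obtain ⟨r, hr1, hr2⟩ := h8 q hq
          have hqc1 : st.2.contains q.1 = true := (h5 q.1).2 (radj_mem_left proc (Or.inl hq))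
          have hqc2 : st.2.contains q.2 = true := (h5 q.2).2 (radj_mem_right proc (Or.inl hq))
          exact ⟨_, tL q.1 r (t2 q.1 r ((m1 q.1).2 (Or.inl hqc1)) (t1 q.1 r hqc1 hr1)),
                 tL q.2 r (t2 q.2 r ((m1 q.2).2 (Or.inl hqc2)) (t1 q.2 r hqc2 hr2))⟩
        · simp at hq
          rw [hq]
          refine ⟨rb, ?_, ?_⟩
          · have h := tL a ra hra
            rw [if_pos rfl] at h
            exact h
          · have h := tL b rb hrb
            rw [if_neg (Ne.symm hne)] at h
            exact h
  · exact hskip rfl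


lemma dp_fold (edges : List (List Int)) :
    ∀ (suf pre : List (List Int)) (st : PySem.Dict Int Int × PySem.Dict Int Int),
      pre ++ suf = edges → DPInv edges pre st →
      DPInv edges (pre ++ suf) (suf.foldl stepB st) := by
  intro suf
  induction suf with
  | nil => intro pre st _ h; simpa using h
  | cons e rest ih =>
    intro pre st heq h
    have he : e ∈ edges := by rw [← heq]; simp
    have h1 := dp_step edges pre st e he h
    have h2 := ih (pre ++ [e]) (stepB st e) (by rw [← heq]; simp) h1
    simpa using h2

lemma dp_init (edges : List (List Int)) :
    DPInv edges [] (PySem.Dict.empty, PySem.Dict.empty) := by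
  refine ⟨by simp [PySem.Dict.keys, PySem.Dict.empty], ?_, ?_, by simp [PySem.Dict.keys, PySem.Dict.empty], ?_, ?_, ?_, ?_⟩ <;>
    simp [PySem.Dict.contains_empty, PySem.Dict.getD_empty, Vl, Epairs]

-- ---------- from the DFS list to components ----------

lemma dfs_L_is_comp (edges : List (List Int)) {visited L : List Int} {r : Int}
    (hclosed : ∀ x ∈ visited, ∀ w, Radj edges x w → w ∈ visited)
    (hrL : r ∈ L)
    (hLdis : ∀ x ∈ L, x ∉ visited)
    (hLr : ∀ x ∈ L, x ∈ Vl edges ∧ ReachE edges r x)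
    (hclo : ∀ x ∈ L, ∀ w, Radj edges x w → w ∈ visited ++ L) :
    ∀ x, x ∈ L ↔ x ∈ compE edges r := by
  intro x
  constructor
  · intro hx
    exact (mem_comp_iff edges).2 ⟨(hLr x hx).1, (hLr x hx).2⟩
  · intro hx
    obtain ⟨hxV, hreach⟩ := (mem_comp_iff edges).1 hx
    clear hx hxV
    induction hreach with
    | refl => exact hrL
    | tail hzy hstep ih =>
      rename_i z w
      have hz : z ∈ L := ih
      have hw := hclo z hz w hstep
      rcases List.mem_append.1 hw with h | h
      · exact absurd (hclosed w h z (radj_symm edges hstep)) (hLdis z hz)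
      · exact h

lemma filter_length_of_set_eq {L : List Int} {C : Finset Int} (hnd : L.Nodup)
    (hset : ∀ x, x ∈ L ↔ x ∈ C) (p : Int → Bool) :
    (L.filter p).length = (C.filter (fun x => p x = true)).card := by
  have h1 : (L.filter p).Nodup := List.Nodup.filter p hnd
  rw [← List.toFinset_card_of_nodup h1]
  congr 1
  ext x
  simp [List.mem_toFinset, List.mem_filter, Finset.mem_filter, hset x]

lemma c1_from_list (edges : List (List Int)) {L : List Int} {r : Int} (hnd : L.Nodup)
    (hset : ∀ x, x ∈ L ↔ x ∈ compE edges r) :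
    (L.filter (fun x => clsF edges x)).length = c1E edges (compE edges r) := by
  rw [filter_length_of_set_eq hnd hset]
  rfl

lemma c2_from_list (edges : List (List Int)) {L : List Int} {r : Int} (hnd : L.Nodup)
    (hset : ∀ x, x ∈ L ↔ x ∈ compE edges r) :
    (L.filter (fun x => !clsF edges x)).length = c2E edges (compE edges r) := by
  rw [filter_length_of_set_eq hnd hset]
  unfold c2E
  congr 1
  apply Finset.filter_congr
  intro x _
  simp

-- ---------- characterizing solution (port A) ----------

def stepA (edges : List (List Int))
    (st : (Int × Int) × PySem.Dict Int (List Int × List Int) × PySem.Set Int × Int)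
    (node : Int) : (Int × Int) × PySem.Dict Int (List Int × List Int) × PySem.Set Int × Int :=
  let ans := st.1
  let groups := st.2.1
  let visited := st.2.2.1
  let num := st.2.2.2
  if PySem.Set.contains visited node then st
  else if (generateGraph edges).contains node = false then
    if PySem.Int.mod node 2 = 0 then ((ans.1 + 1, ans.2), groups, visited, num)
    else ((ans.1, ans.2 + 1), groups, visited, num)
  else
    let r := dfsA (generateGraph edges) (2 * edges.length + 1) groups num node visited
    (ans, r.1, r.2, num + 1)

lemma NVc_le_fuel (edges : List (List Int)) (v : List Int) :
    NVc edges v ≤ 2 * edges.length := by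
  have h1 : NVc edges v ≤ (Vl edges).toFinset.card :=
    Finset.card_le_card (Finset.sdiff_subset)
  have h2 : (Vl edges).toFinset.card ≤ (Vl edges).length := (Vl edges).toFinset_card_le
  have h3 : (Vl edges).length = 2 * (Epairs edges).length := by
    unfold Vl
    induction Epairs edges with
    | nil => simp
    | cons p ps ih => simp [List.flatMap_cons, ih]; omega
  have h4 : (Epairs edges).length ≤ edges.length := by
    unfold Epairs
    exact List.length_filterMap_le _ _
  omega

def isoP1 (edges : List (List Int)) (n : Int) : Bool :=
  !decide (n ∈ Vl edges) && decide (PySem.Int.mod n 2 = 0)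
def isoP2 (edges : List (List Int)) (n : Int) : Bool :=
  !decide (n ∈ Vl edges) && !decide (PySem.Int.mod n 2 = 0)

lemma solA_fold (edges : List (List Int)) :
    ∀ (ns : List Int) (st : (Int × Int) × PySem.Dict Int (List Int × List Int) × PySem.Set Int × Int)
      (roots : List Int),
      (∀ r ∈ roots, r ∈ Vl edges) →
      List.Pairwise (fun r s => ¬ ReachE edges r s) roots →
      (st.2.2.1 : List Int).Nodup →
      (∀ x : Int, x ∈ st.2.2.1 ↔ (x ∈ Vl edges ∧ ∃ r ∈ roots, ReachE edges r x)) →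
      st.2.2.2 = (roots.length : Int) →
      st.2.1.keys = (List.range roots.length).map (fun (i : Nat) => (i : Int)) →
      st.2.1.values.map (fun pr => (pr.1.length, pr.2.length)) =
        roots.map (fun r => (c1E edges (compE edges r), c2E edges (compE edges r))) →
      ∃ ext : List Int,
        (∀ r ∈ ext, r ∈ ns) ∧
        (∀ r ∈ roots ++ ext, r ∈ Vl edges) ∧
        List.Pairwise (fun r s => ¬ ReachE edges r s) (roots ++ ext) ∧
        (∀ n ∈ ns, n ∈ Vl edges → ∃ r ∈ roots ++ ext, ReachE edges r n) ∧
        (ns.foldl (stepA edges) st).1 =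
          (st.1.1 + (ns.countP (isoP1 edges) : Int), st.1.2 + (ns.countP (isoP2 edges) : Int)) ∧
        ((ns.foldl (stepA edges) st).2.2.1 : List Int).Nodup ∧
        (∀ x : Int, x ∈ (ns.foldl (stepA edges) st).2.2.1 ↔
          (x ∈ Vl edges ∧ ∃ r ∈ roots ++ ext, ReachE edges r x)) ∧
        (ns.foldl (stepA edges) st).2.2.2 = ((roots ++ ext).length : Int) ∧
        (ns.foldl (stepA edges) st).2.1.keys =
          (List.range (roots ++ ext).length).map (fun (i : Nat) => (i : Int)) ∧
        (ns.foldl (stepA edges) st).2.1.values.map (fun pr => (pr.1.length, pr.2.length)) =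
          (roots ++ ext).map (fun r => (c1E edges (compE edges r), c2E edges (compE edges r))) := by
  intro ns
  induction ns with
  | nil =>
    intro st roots hrV hpw hvnd hvis hnum hkeys hvals
    exact ⟨[], by simp, by simpa using hrV, by simpa using hpw, by simp,
      by simp, by simpa using hvnd, by simpa using hvis, by simpa using hnum,
      by simpa using hkeys, by simpa using hvals⟩
  | cons n rest ih =>
    intro st roots hrV hpw hvnd hvis hnum hkeys hvals
    by_cases hmem : n ∈ st.2.2.1
    · -- already visited
      have hc : PySem.Set.contains st.2.2.1 n = true := by
        simp [PySem.Set.contains_iff, hmem]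
      have hstep : stepA edges st n = st := by
        unfold stepA
        rw [if_pos hc]
      have hnviso : isoP1 edges n = false ∧ isoP2 edges n = false := by
        have := ((hvis n).1 hmem).1
        constructor <;> simp [isoP1, isoP2, this]
      rw [List.foldl_cons, hstep]
      obtain ⟨ext, hext, hrV', hpw', hcov', hiso', hvnd', hvis', hnum', hkeys', hvals'⟩ :=
        ih st roots hrV hpw hvnd hvis hnum hkeys hvals
      refine ⟨ext, fun r hr => by simp [hext r hr], hrV', hpw', ?_, ?_, hvnd', hvis', hnum',
        hkeys', hvals'⟩
      · intro m hm hmV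
        rcases List.mem_cons.1 hm with h | h
        · obtain ⟨_, r, hr, hre⟩ := (hvis n).1 hmem
          exact ⟨r, by simp [hr], by rw [h]; exact hre⟩
        · exact hcov' m h hmV
      · rw [hiso', List.countP_cons, List.countP_cons]
        simp [hnviso.1, hnviso.2]
    · by_cases hV : n ∈ Vl edges
      · -- new component root
        have hc : ¬ (PySem.Set.contains st.2.2.1 n = true) := by
          simp [PySem.Set.contains_iff, hmem]
        have hgc : ¬ ((generateGraph edges).contains n = false) := by
          rw [graph_contains]
          simp [hV]
        have hknd : st.2.1.keys.Nodup := by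
          rw [hkeys]
          exact List.Nodup.map (fun a b h => by exact_mod_cast h) List.nodup_range
        have hfuel : NVc edges st.2.2.1 ≤ 2 * edges.length + 1 :=
          le_trans (NVc_le_fuel edges _) (Nat.le_succ _)
        obtain ⟨L, hres, hLnd, hLdis, hLcur, hLr, hLclo⟩ :=
          (dfs_main edges (2 * edges.length + 1)).1 st.2.1 st.2.2.2 n st.2.2.1
            hknd hV hmem hvnd hfuel
        have hclosed : ∀ x ∈ st.2.2.1, ∀ w, Radj edges x w → w ∈ st.2.2.1 := by
          intro x hx w hw
          obtain ⟨hxV, r, hr, hre⟩ := (hvis x).1 hx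
          exact (hvis w).2 ⟨radj_mem_right edges hw, r, hr,
            Relation.ReflTransGen.tail hre hw⟩
        have hLset : ∀ x, x ∈ L ↔ x ∈ compE edges n :=
          dfs_L_is_comp edges hclosed hLcur hLdis hLr hLclo
        have hstep : stepA edges st n =
            (st.1, (dfsA (generateGraph edges) (2 * edges.length + 1) st.2.1 st.2.2.2 n st.2.2.1).1,
             (dfsA (generateGraph edges) (2 * edges.length + 1) st.2.1 st.2.2.2 n st.2.2.1).2,
             st.2.2.2 + 1) := by
          unfold stepA
          rw [if_neg hc, if_neg hgc]
        have hnotin : st.2.1.contains st.2.2.2 = false := by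
          rw [PySem.Dict.contains_eq_decide_mem_keys, hkeys, hnum]
          simp only [List.mem_map, List.mem_range, decide_eq_false_iff_not]
          rintro ⟨i, hi, hie⟩
          have : i = roots.length := by exact_mod_cast hie
          omega
        have hmodins : st.2.1.modify st.2.2.2 ([], []) (fun pr =>
            (pr.1 ++ L.filter (fun x => clsF edges x),
             pr.2 ++ L.filter (fun x => !clsF edges x))) =
            st.2.1.insert st.2.2.2
              (L.filter (fun x => clsF edges x), L.filter (fun x => !clsF edges x)) := by
          unfold PySem.Dict.modify
          rw [PySem.Dict.getD_of_not_contains _ _ hnotin]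
          rfl
        rw [List.foldl_cons, hstep, hres]
        have hpairs : ((st.2.1.modify st.2.2.2 ([], []) (fun pr =>
            (pr.1 ++ L.filter (fun x => clsF edges x),
             pr.2 ++ L.filter (fun x => !clsF edges x))), st.2.2.1 ++ L).1,
            (st.2.1.modify st.2.2.2 ([], []) (fun pr =>
            (pr.1 ++ L.filter (fun x => clsF edges x),
             pr.2 ++ L.filter (fun x => !clsF edges x))), st.2.2.1 ++ L).2) =
            (st.2.1.insert st.2.2.2
              (L.filter (fun x => clsF edges x), L.filter (fun x => !clsF edges x)),
             st.2.2.1 ++ L) := by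
          rw [hmodins]
        -- invariant data for roots ++ [n]
        have hrV1 : ∀ r ∈ roots ++ [n], r ∈ Vl edges := by
          intro r hr
          rcases List.mem_append.1 hr with h | h
          · exact hrV r h
          · simp at h; rw [h]; exact hV
        have hnoreach : ∀ r ∈ roots, ¬ ReachE edges r n := by
          intro r hr hre
          exact hmem ((hvis n).2 ⟨hV, r, hr, hre⟩)
        have hpw1 : List.Pairwise (fun r s => ¬ ReachE edges r s) (roots ++ [n]) := by
          rw [List.pairwise_append]
          exact ⟨hpw, by simp, by simpa using hnoreach⟩
        have hvnd1 : (st.2.2.1 ++ L).Nodup :=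
          List.Nodup.append hvnd hLnd (fun a ha hb => (hLdis a hb) ha)
        have hvis1 : ∀ x : Int, x ∈ st.2.2.1 ++ L ↔
            (x ∈ Vl edges ∧ ∃ r ∈ roots ++ [n], ReachE edges r x) := by
          intro x
          rw [List.mem_append, hvis x]
          constructor
          · rintro (⟨hxV, r, hr, hre⟩ | hxL)
            · exact ⟨hxV, r, by simp [hr], hre⟩
            · obtain ⟨hxV, hre⟩ := (mem_comp_iff edges).1 ((hLset x).1 hxL)
              exact ⟨hxV, n, by simp, hre⟩
          · rintro ⟨hxV, r, hr, hre⟩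
            rcases List.mem_append.1 hr with h | h
            · exact Or.inl ⟨hxV, r, h, hre⟩
            · simp at h
              rw [h] at hre
              exact Or.inr ((hLset x).2 ((mem_comp_iff edges).2 ⟨hxV, hre⟩))
        have hkeys1 : (st.2.1.insert st.2.2.2
            (L.filter (fun x => clsF edges x), L.filter (fun x => !clsF edges x))).keys =
            (List.range (roots ++ [n]).length).map (fun (i : Nat) => (i : Int)) := by
          rw [PySem.Dict.keys_insert_of_not_contains _ _ hnotin, hkeys, hnum]
          simp [List.range_succ]
        have hvals1 : (st.2.1.insert st.2.2.2
            (L.filter (fun x => clsF edges x), L.filter (fun x => !clsF edges x))).values.map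
              (fun pr => (pr.1.length, pr.2.length)) =
            (roots ++ [n]).map (fun r => (c1E edges (compE edges r), c2E edges (compE edges r))) := by
          unfold PySem.Dict.values
          rw [PySem.Dict.items_insert_of_not_contains _ _ hnotin]
          rw [List.map_append, List.map_append]
          show st.2.1.values.map _ ++ _ = _
          rw [hvals, List.map_append]
          congr 1
          simp [c1_from_list edges hLnd hLset, c2_from_list edges hLnd hLset]
        obtain ⟨ext, hext, hrV', hpw', hcov', hiso', hvnd', hvis', hnum', hkeys', hvals'⟩ :=
          ih (st.1, st.2.1.insert st.2.2.2
              (L.filter (fun x => clsF edges x), L.filter (fun x => !clsF edges x)),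
              st.2.2.1 ++ L, st.2.2.2 + 1) (roots ++ [n])
            hrV1 hpw1 hvnd1 hvis1 (by simp [hnum]) hkeys1 hvals1
        have hnviso : isoP1 edges n = false ∧ isoP2 edges n = false := by
          constructor <;> simp [isoP1, isoP2, hV]
        have hstate : (st.1, (st.2.1.modify st.2.2.2 ([], []) (fun pr =>
            (pr.1 ++ L.filter (fun x => clsF edges x),
             pr.2 ++ L.filter (fun x => !clsF edges x))), st.2.2.1 ++ L).1,
            (st.2.1.modify st.2.2.2 ([], []) (fun pr =>
            (pr.1 ++ L.filter (fun x => clsF edges x),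
             pr.2 ++ L.filter (fun x => !clsF edges x))), st.2.2.1 ++ L).2, st.2.2.2 + 1) =
            (st.1, st.2.1.insert st.2.2.2
              (L.filter (fun x => clsF edges x), L.filter (fun x => !clsF edges x)),
              st.2.2.1 ++ L, st.2.2.2 + 1) := by
          rw [hmodins]
        rw [hstate]
        refine ⟨n :: ext, ?_, ?_, ?_, ?_, ?_, hvnd', ?_, ?_, ?_, ?_⟩
        · intro r hr
          rcases List.mem_cons.1 hr with h | h
          · simp [h]
          · simp [hext r h]
        · intro r hr
          apply hrV' r
          simp at hr ⊢
          tauto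
        · have h : roots ++ n :: ext = (roots ++ [n]) ++ ext := by simp
          rw [h]
          exact hpw'
        · intro m hm hmV
          rcases List.mem_cons.1 hm with h | h
          · refine ⟨n, by simp, ?_⟩
            rw [h]
            exact .refl
          · obtain ⟨r, hr, hre⟩ := hcov' m h hmV
            refine ⟨r, ?_, hre⟩
            simp at hr ⊢
            tauto
        · rw [hiso', List.countP_cons, List.countP_cons]
          simp [hnviso.1, hnviso.2]
        · intro x
          rw [hvis' x]
          constructor <;> rintro ⟨hxV, r, hr, hre⟩ <;> refine ⟨hxV, r, ?_, hre⟩ <;>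
            simp at hr ⊢ <;> tauto
        · rw [hnum']
          simp
        · rw [hkeys']
          simp
        · rw [hvals']
          simp
      · -- isolated node
        have hc : ¬ (PySem.Set.contains st.2.2.1 n = true) := by
          simp [PySem.Set.contains_iff, hmem]
        have hgc : (generateGraph edges).contains n = false := by
          rw [graph_contains]
          simp [hV]
        have hstep : stepA edges st n =
            (if PySem.Int.mod n 2 = 0 then ((st.1.1 + 1, st.1.2), st.2.1, st.2.2.1, st.2.2.2)
             else ((st.1.1, st.1.2 + 1), st.2.1, st.2.2.1, st.2.2.2)) := by
          unfold stepA
          rw [if_neg hc, if_pos hgc]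
        by_cases hpar : PySem.Int.mod n 2 = 0
        · have hdvd : (2 : Int) ∣ n := (PySem.Int.mod_eq_zero_iff_dvd n 2).1 hpar
          rw [List.foldl_cons, hstep, if_pos hpar]
          obtain ⟨ext, hext, hrV', hpw', hcov', hiso', hvnd', hvis', hnum', hkeys', hvals'⟩ :=
            ih ((st.1.1 + 1, st.1.2), st.2.1, st.2.2.1, st.2.2.2) roots
              hrV hpw hvnd hvis hnum hkeys hvals
          refine ⟨ext, fun r hr => by simp [hext r hr], hrV', hpw', ?_, ?_, hvnd', hvis',
            hnum', hkeys', hvals'⟩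
          · intro m hm hmV
            rcases List.mem_cons.1 hm with h | h
            · exact absurd hmV (by rw [h]; exact hV)
            · exact hcov' m h hmV
          · rw [hiso', List.countP_cons, List.countP_cons]
            have h1 : isoP1 edges n = true := by simp [isoP1, hV, hpar, hdvd]
            have h2 : isoP2 edges n = false := by simp [isoP2, hV, hpar, hdvd]
            simp [h1, h2, Prod.ext_iff]
            push_cast
            omega
        · have hdvd : ¬ ((2 : Int) ∣ n) := fun hd => hpar ((PySem.Int.mod_eq_zero_iff_dvd n 2).2 hd)
          rw [List.foldl_cons, hstep, if_neg hpar]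
          obtain ⟨ext, hext, hrV', hpw', hcov', hiso', hvnd', hvis', hnum', hkeys', hvals'⟩ :=
            ih ((st.1.1, st.1.2 + 1), st.2.1, st.2.2.1, st.2.2.2) roots
              hrV hpw hvnd hvis hnum hkeys hvals
          refine ⟨ext, fun r hr => by simp [hext r hr], hrV', hpw', ?_, ?_, hvnd', hvis',
            hnum', hkeys', hvals'⟩
          · intro m hm hmV
            rcases List.mem_cons.1 hm with h | h
            · exact absurd hmV (by rw [h]; exact hV)
            · exact hcov' m h hmV
          · rw [hiso', List.countP_cons, List.countP_cons]
            have h1 : isoP1 edges n = false := by simp [isoP1, hV, hpar, hdvd]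
            have h2 : isoP2 edges n = true := by simp [isoP2, hV, hpar, hdvd]
            simp [h1, h2, Prod.ext_iff]
            push_cast
            omega

lemma values_fold_counts (vals : List (List Int × List Int)) (iso : Int × Int) :
    vals.foldl (fun (a : Int × Int) g =>
      (a.1 + (if g.1.length = 1 then 1 else 0), a.2 + (if g.2.length = 1 then 1 else 0))) iso =
    (iso.1 + (vals.countP (fun g => decide (g.1.length = 1)) : Int),
     iso.2 + (vals.countP (fun g => decide (g.2.length = 1)) : Int)) := by
  induction vals generalizing iso with
  | nil => simp
  | cons v vs ih =>
    rw [List.foldl_cons, ih, List.countP_cons, List.countP_cons]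
    by_cases h1 : v.1.length = 1 <;> by_cases h2 : v.2.length = 1 <;>
      simp [h1, h2, Prod.ext_iff] <;> push_cast <;> omega

lemma countP_of_len_map (vals : List (List Int × List Int)) (cs : List (Nat × Nat))
    (h : vals.map (fun pr => (pr.1.length, pr.2.length)) = cs) :
    vals.countP (fun g => decide (g.1.length = 1)) = cs.countP (fun c => decide (c.1 = 1)) ∧
    vals.countP (fun g => decide (g.2.length = 1)) = cs.countP (fun c => decide (c.2 = 1)) := by
  subst h
  rw [List.countP_map, List.countP_map]
  exact ⟨rfl, rfl⟩

theorem solution_charA (nodes : List Int) (edges : List (List Int)) :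
    ∃ roots : List Int,
      (∀ r ∈ roots, r ∈ Vl edges) ∧
      List.Pairwise (fun r s => ¬ ReachE edges r s) roots ∧
      (∀ n ∈ nodes, n ∈ Vl edges → ∃ r ∈ roots, ReachE edges r n) ∧
      (∀ r ∈ roots, ∃ n ∈ nodes, ReachE edges r n) ∧
      solution nodes edges =
        [(nodes.countP (isoP1 edges) : Int) +
           (roots.countP (fun r => decide (c1E edges (compE edges r) = 1)) : Int),
         (nodes.countP (isoP2 edges) : Int) +
           (roots.countP (fun r => decide (c2E edges (compE edges r) = 1)) : Int)] := by
  obtain ⟨ext, hext, hrV, hpw, hcov, hiso, hvnd, hvis, hnum, hkeys, hvals⟩ :=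
    solA_fold edges nodes ((0, 0), PySem.Dict.empty, PySem.Set.empty, 0) []
      (by simp) (by simp) (by simp [PySem.Set.empty])
      (by intro x; simp [PySem.Set.empty])
      (by simp) (by simp [PySem.Dict.keys, PySem.Dict.empty])
      (by simp [PySem.Dict.values, PySem.Dict.empty])
  refine ⟨ext, by simpa using hrV, by simpa using hpw, by simpa using hcov,
    (fun r hr => ⟨r, hext r hr, .refl⟩), ?_⟩
  have hsol : solution nodes edges =
      (let fin := nodes.foldl (stepA edges) ((0, 0), PySem.Dict.empty, PySem.Set.empty, 0)
       let ans := fin.2.1.values.foldl (fun (a : Int × Int) g =>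
         (a.1 + (if g.1.length = 1 then 1 else 0), a.2 + (if g.2.length = 1 then 1 else 0))) fin.1
       [ans.1, ans.2]) := rfl
  obtain ⟨hc1, hc2⟩ := countP_of_len_map _ _ hvals
  rw [hsol]
  simp only [values_fold_counts, hiso]
  rw [hc1, hc2, List.countP_map, List.countP_map]
  simp only [List.nil_append, List.cons.injEq, and_true]
  constructor <;> · congr 1; omega

-- ---------- characterizing solution_alt (port B) ----------

def stepB2 (deg parent : PySem.Dict Int Int) (st : (Int × Int) × PySem.Set Int)
    (node : Int) : (Int × Int) × PySem.Set Int :=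
  if deg.contains node = false then
    if PySem.Int.mod node 2 = 0 then ((st.1.1 + 1, st.1.2), st.2)
    else ((st.1.1, st.1.2 + 1), st.2)
  else (st.1, PySem.Set.add st.2 (findB parent (parent.size + 1) node))

def stepC (deg parent : PySem.Dict Int Int) (usedRoots : PySem.Set Int)
    (cnt : PySem.Dict Int (Int × Int)) (v : Int) : PySem.Dict Int (Int × Int) :=
  let r := findB parent (parent.size + 1) v
  if PySem.Set.contains usedRoots r then
    let c := cnt.getD r (0, 0)
    if PySem.Int.mod (deg.getD v 0) 2 = PySem.Int.mod v 2 then cnt.insert r (c.1 + 1, c.2)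
    else cnt.insert r (c.1, c.2 + 1)
  else cnt

lemma solution_alt_unfold (nodes : List Int) (edges : List (List Int)) :
    solution_alt nodes edges =
      (let dp := edges.foldl stepB (PySem.Dict.empty, PySem.Dict.empty)
       let st2 := nodes.foldl (stepB2 dp.1 dp.2) ((0, 0), PySem.Set.empty)
       let cnt := dp.1.keys.foldl (stepC dp.1 dp.2 st2.2) PySem.Dict.empty
       let ans := cnt.values.foldl (fun (a : Int × Int) c =>
         (a.1 + (if c.1 = 1 then 1 else 0), a.2 + (if c.2 = 1 then 1 else 0))) st2.1
       [ans.1, ans.2]) := rfl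

lemma b2_fold (edges : List (List Int)) (deg parent : PySem.Dict Int Int)
    (hdc : ∀ u : Int, deg.contains u = true ↔ u ∈ Vl edges) :
    ∀ (ns : List Int) (st : (Int × Int) × PySem.Set Int),
      (st.2 : List Int).Nodup →
      ((ns.foldl (stepB2 deg parent) st).1 =
        (st.1.1 + (ns.countP (isoP1 edges) : Int), st.1.2 + (ns.countP (isoP2 edges) : Int))) ∧
      ((ns.foldl (stepB2 deg parent) st).2 : List Int).Nodup ∧
      (∀ x : Int, x ∈ (ns.foldl (stepB2 deg parent) st).2 ↔
        (x ∈ st.2 ∨ ∃ n ∈ ns, n ∈ Vl edges ∧ x = findB parent (parent.size + 1) n)) := by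
  intro ns
  induction ns with
  | nil => intro st hnd; exact ⟨by simp, hnd, by simp⟩
  | cons n rest ih =>
    intro st hnd
    by_cases hV : n ∈ Vl edges
    · have hc : ¬ (deg.contains n = false) := by
        rw [(by simp : (deg.contains n = false) = (¬ deg.contains n = true))]
        simp [hdc, hV]
      have hstep : stepB2 deg parent st n =
          (st.1, PySem.Set.add st.2 (findB parent (parent.size + 1) n)) := by
        unfold stepB2
        rw [if_neg hc]
      have hnd' : (PySem.Set.add st.2 (findB parent (parent.size + 1) n) : List Int).Nodup :=
        PySem.Set.nodup_add _ _ hnd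
      obtain ⟨hiso, hnd'', hmem⟩ := ih (st.1, PySem.Set.add st.2 (findB parent (parent.size + 1) n)) hnd'
      have hniso : isoP1 edges n = false ∧ isoP2 edges n = false := by
        constructor <;> simp [isoP1, isoP2, hV]
      rw [List.foldl_cons, hstep]
      refine ⟨?_, hnd'', ?_⟩
      · rw [hiso, List.countP_cons, List.countP_cons]
        simp [hniso.1, hniso.2]
      · intro x
        rw [hmem x, PySem.Set.mem_add]
        constructor
        · rintro ((h | h) | ⟨m, hm, hmV, hx⟩)
          · exact Or.inl h
          · exact Or.inr ⟨n, by simp, hV, h⟩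
          · exact Or.inr ⟨m, by simp [hm], hmV, hx⟩
        · rintro (h | ⟨m, hm, hmV, hx⟩)
          · exact Or.inl (Or.inl h)
          · rcases List.mem_cons.1 hm with h' | h'
            · exact Or.inl (Or.inr (by rw [hx, h']))
            · exact Or.inr ⟨m, h', hmV, hx⟩
    · have hc : deg.contains n = false := by
        rcases Bool.eq_false_or_eq_true (deg.contains n) with h | h
        · exact absurd ((hdc n).1 h) hV
        · exact h
      have hstep : stepB2 deg parent st n =
          (if PySem.Int.mod n 2 = 0 then ((st.1.1 + 1, st.1.2), st.2)
           else ((st.1.1, st.1.2 + 1), st.2)) := by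
        unfold stepB2
        rw [if_pos hc]
      by_cases hpar : PySem.Int.mod n 2 = 0
      · have hdvd : (2 : Int) ∣ n := (PySem.Int.mod_eq_zero_iff_dvd n 2).1 hpar
        rw [List.foldl_cons, hstep, if_pos hpar]
        obtain ⟨hiso, hnd'', hmem⟩ := ih ((st.1.1 + 1, st.1.2), st.2) hnd
        have h1 : isoP1 edges n = true := by simp [isoP1, hV, hdvd]
        have h2 : isoP2 edges n = false := by simp [isoP2, hV, hdvd]
        refine ⟨?_, hnd'', ?_⟩
        · rw [hiso, List.countP_cons, List.countP_cons]
          simp [h1, h2, Prod.ext_iff]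
          push_cast
          omega
        · intro x
          rw [hmem x]
          constructor
          · rintro (h | ⟨m, hm, hmV, hx⟩)
            · exact Or.inl h
            · exact Or.inr ⟨m, by simp [hm], hmV, hx⟩
          · rintro (h | ⟨m, hm, hmV, hx⟩)
            · exact Or.inl h
            · rcases List.mem_cons.1 hm with h' | h'
              · exact absurd hmV (by rw [h']; exact hV)
              · exact Or.inr ⟨m, h', hmV, hx⟩
      · have hdvd : ¬ ((2 : Int) ∣ n) := fun hd => hpar ((PySem.Int.mod_eq_zero_iff_dvd n 2).2 hd)
        rw [List.foldl_cons, hstep, if_neg hpar]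
        obtain ⟨hiso, hnd'', hmem⟩ := ih ((st.1.1, st.1.2 + 1), st.2) hnd
        have h1 : isoP1 edges n = false := by simp [isoP1, hV, hdvd]
        have h2 : isoP2 edges n = true := by simp [isoP2, hV, hdvd]
        refine ⟨?_, hnd'', ?_⟩
        · rw [hiso, List.countP_cons, List.countP_cons]
          simp [h1, h2, Prod.ext_iff]
          push_cast
          omega
        · intro x
          rw [hmem x]
          constructor
          · rintro (h | ⟨m, hm, hmV, hx⟩)
            · exact Or.inl h
            · exact Or.inr ⟨m, by simp [hm], hmV, hx⟩
          · rintro (h | ⟨m, hm, hmV, hx⟩)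
            · exact Or.inl h
            · rcases List.mem_cons.1 hm with h' | h'
              · exact absurd hmV (by rw [h']; exact hV)
              · exact Or.inr ⟨m, h', hmV, hx⟩

lemma cnt_fold (edges : List (List Int)) (deg parent : PySem.Dict Int Int)
    (used : PySem.Set Int)
    (hcond : ∀ v : Int,
      (PySem.Int.mod (deg.getD v 0) 2 = PySem.Int.mod v 2) ↔ clsF edges v = true) :
    ∀ (ks pre : List Int) (cnt : PySem.Dict Int (Int × Int)),
      cnt.keys.Nodup →
      (∀ r : Int, r ∈ cnt.keys ↔
        (r ∈ used ∧ ∃ v ∈ pre, findB parent (parent.size + 1) v = r)) →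
      (∀ r : Int, r ∈ cnt.keys → cnt.getD r (0, 0) =
        ((pre.countP (fun v => decide (findB parent (parent.size + 1) v = r) && clsF edges v) : Int),
         (pre.countP (fun v => decide (findB parent (parent.size + 1) v = r) && !clsF edges v) : Int))) →
      (ks.foldl (stepC deg parent used) cnt).keys.Nodup ∧
      (∀ r : Int, r ∈ (ks.foldl (stepC deg parent used) cnt).keys ↔
        (r ∈ used ∧ ∃ v ∈ pre ++ ks, findB parent (parent.size + 1) v = r)) ∧
      (∀ r : Int, r ∈ (ks.foldl (stepC deg parent used) cnt).keys →
        (ks.foldl (stepC deg parent used) cnt).getD r (0, 0) =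
        (((pre ++ ks).countP (fun v => decide (findB parent (parent.size + 1) v = r) && clsF edges v) : Int),
         ((pre ++ ks).countP (fun v => decide (findB parent (parent.size + 1) v = r) && !clsF edges v) : Int))) := by
  intro ks
  induction ks with
  | nil =>
    intro pre cnt hnd hkeys hvals
    exact ⟨hnd, by simpa using hkeys, by simpa using hvals⟩
  | cons v ks ih =>
    intro pre cnt hnd hkeys hvals
    set r0 := findB parent (parent.size + 1) v with hr0
    by_cases hused : r0 ∈ (used : List Int)
    · have hu : PySem.Set.contains used r0 = true := by simp [PySem.Set.contains_iff, hused]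
      have hgetD : cnt.getD r0 (0, 0) =
          ((pre.countP (fun w => decide (findB parent (parent.size + 1) w = r0) && clsF edges w) : Int),
           (pre.countP (fun w => decide (findB parent (parent.size + 1) w = r0) && !clsF edges w) : Int)) := by
        by_cases hin : r0 ∈ cnt.keys
        · exact hvals r0 hin
        · have hnone : ∀ w ∈ pre, ¬ (findB parent (parent.size + 1) w = r0) := by
            intro w hw hfw
            exact hin ((hkeys r0).2 ⟨hused, w, hw, hfw⟩)
          rw [PySem.Dict.getD_of_not_contains]
          · have hz : ∀ (q : Int → Bool), pre.countP (fun w =>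
                decide (findB parent (parent.size + 1) w = r0) && q w) = 0 := by
              intro q
              rw [List.countP_eq_zero]
              intro w hw
              simp [hnone w hw]
            rw [hz, hz]
            simp
          · rw [PySem.Dict.contains_eq_decide_mem_keys]
            simp [hin]
      have hknd' : ∀ c : Int × Int, (cnt.insert r0 c).keys.Nodup :=
        fun c => PySem.Dict.nodup_keys_insert _ _ _ hnd
      have hkeys' : ∀ (c : Int × Int) (r : Int), r ∈ (cnt.insert r0 c).keys ↔
          (r ∈ used ∧ ∃ w ∈ pre ++ [v], findB parent (parent.size + 1) w = r) := by
        intro c r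
        rw [PySem.Dict.mem_keys_insert, hkeys r]
        constructor
        · rintro (h | ⟨h1, w, hw, hfw⟩)
          · exact ⟨by rw [h]; exact hused, v, by simp, by rw [h]⟩
          · exact ⟨h1, w, by simp [hw], hfw⟩
        · rintro ⟨h1, w, hw, hfw⟩
          rcases List.mem_append.1 hw with h' | h'
          · exact Or.inr ⟨h1, w, h', hfw⟩
          · simp at h'
            rw [h'] at hfw
            exact Or.inl hfw.symm
      have hvals' : ∀ (c : Int × Int) (r : Int), r ≠ r0 → (cnt.insert r0 c).getD r (0, 0) = cnt.getD r (0, 0) :=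
        fun c r hne => by rw [PySem.Dict.getD_insert, if_neg hne]
      have hcntP_ne : ∀ (r : Int), r ≠ r0 → ∀ (q : Int → Bool),
          (pre ++ [v]).countP (fun w => decide (findB parent (parent.size + 1) w = r) && q w) =
          pre.countP (fun w => decide (findB parent (parent.size + 1) w = r) && q w) := by
        intro r hne q
        rw [List.countP_append]
        simp [hne.symm, ← hr0]
      have hcntP_eq_cls : ∀ q : Int → Bool,
          (pre ++ [v]).countP (fun w => decide (findB parent (parent.size + 1) w = r0) && q w) =
          pre.countP (fun w => decide (findB parent (parent.size + 1) w = r0) && q w) +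
            (if q v then 1 else 0) := by
        intro q
        rw [List.countP_append]
        by_cases hq : q v <;> simp [hq, ← hr0]
      by_cases hcl : PySem.Int.mod (deg.getD v 0) 2 = PySem.Int.mod v 2
      · have hclT : clsF edges v = true := (hcond v).1 hcl
        have hstep : stepC deg parent used cnt v =
            cnt.insert r0 ((cnt.getD r0 (0, 0)).1 + 1, (cnt.getD r0 (0, 0)).2) := by
          unfold stepC
          rw [← hr0, if_pos hu, if_pos hcl]
        rw [List.foldl_cons, hstep]
        have happ : pre ++ v :: ks = (pre ++ [v]) ++ ks := by simp
        rw [happ]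
        apply ih (pre ++ [v])
        · exact hknd' _
        · exact hkeys' _
        · intro r hr
          by_cases hne : r = r0
          · rw [hne, PySem.Dict.getD_insert_self, hgetD]
            rw [hcntP_eq_cls, hcntP_eq_cls]
            simp [hclT, Prod.ext_iff] <;> push_cast <;> omega
          · rw [hvals' _ r hne, hcntP_ne r hne, hcntP_ne r hne]
            apply hvals
            rcases (hkeys' _ r).1 hr with ⟨h1, w, hw, hfw⟩
            rcases List.mem_append.1 hw with h' | h'
            · exact (hkeys r).2 ⟨h1, w, h', hfw⟩
            · simp at h'
              rw [h'] at hfw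
              exact absurd hfw.symm hne
      · have hclF : clsF edges v = false := by
          rcases Bool.eq_false_or_eq_true (clsF edges v) with h | h
          · exact absurd ((hcond v).2 h) hcl
          · exact h
        have hstep : stepC deg parent used cnt v =
            cnt.insert r0 ((cnt.getD r0 (0, 0)).1, (cnt.getD r0 (0, 0)).2 + 1) := by
          unfold stepC
          rw [← hr0, if_pos hu, if_neg hcl]
        rw [List.foldl_cons, hstep]
        have happ : pre ++ v :: ks = (pre ++ [v]) ++ ks := by simp
        rw [happ]
        apply ih (pre ++ [v])
        · exact hknd' _
        · exact hkeys' _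
        · intro r hr
          by_cases hne : r = r0
          · rw [hne, PySem.Dict.getD_insert_self, hgetD]
            rw [hcntP_eq_cls, hcntP_eq_cls]
            simp [hclF, Prod.ext_iff] <;> push_cast <;> omega
          · rw [hvals' _ r hne, hcntP_ne r hne, hcntP_ne r hne]
            apply hvals
            rcases (hkeys' _ r).1 hr with ⟨h1, w, hw, hfw⟩
            rcases List.mem_append.1 hw with h' | h'
            · exact (hkeys r).2 ⟨h1, w, h', hfw⟩
            · simp at h'
              rw [h'] at hfw
              exact absurd hfw.symm hne
    · have hu : ¬ (PySem.Set.contains used r0 = true) := by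
        simp [PySem.Set.contains_iff, hused]
      have hstep : stepC deg parent used cnt v = cnt := by
        unfold stepC
        rw [← hr0, if_neg hu]
      rw [List.foldl_cons, hstep]
      have happ : pre ++ v :: ks = (pre ++ [v]) ++ ks := by simp
      rw [happ]
      apply ih (pre ++ [v]) cnt hnd
      · intro r
        rw [hkeys r]
        constructor
        · rintro ⟨h1, w, hw, hfw⟩
          exact ⟨h1, w, by simp [hw], hfw⟩
        · rintro ⟨h1, w, hw, hfw⟩
          rcases List.mem_append.1 hw with h' | h'
          · exact ⟨h1, w, h', hfw⟩
          · simp at h'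
            rw [h'] at hfw
            rw [← hfw] at h1
            exact absurd h1 hused
      · intro r hr
        have hrne : r ≠ r0 := by
          intro h
          rw [h] at hr
          exact hused (((hkeys r0).1 hr).1)
        have : ∀ (q : Int → Bool),
            (pre ++ [v]).countP (fun w => decide (findB parent (parent.size + 1) w = r) && q w) =
            pre.countP (fun w => decide (findB parent (parent.size + 1) w = r) && q w) := by
          intro q
          rw [List.countP_append]
          simp [hrne.symm, ← hr0]
        rw [this, this]
        exact hvals r hr

lemma values_fold_counts_int (vals : List (Int × Int)) (iso : Int × Int) :
    vals.foldl (fun (a : Int × Int) c =>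
      (a.1 + (if c.1 = 1 then 1 else 0), a.2 + (if c.2 = 1 then 1 else 0))) iso =
    (iso.1 + (vals.countP (fun c => decide (c.1 = 1)) : Int),
     iso.2 + (vals.countP (fun c => decide (c.2 = 1)) : Int)) := by
  induction vals generalizing iso with
  | nil => simp
  | cons v vs ih =>
    rw [List.foldl_cons, ih, List.countP_cons, List.countP_cons]
    by_cases h1 : v.1 = 1 <;> by_cases h2 : v.2 = 1 <;>
      simp [h1, h2, Prod.ext_iff] <;> push_cast <;> omega

theorem solution_charB (nodes : List Int) (edges : List (List Int)) :
    ∃ roots : List Int,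
      (∀ r ∈ roots, r ∈ Vl edges) ∧
      List.Pairwise (fun r s => ¬ ReachE edges r s) roots ∧
      (∀ n ∈ nodes, n ∈ Vl edges → ∃ r ∈ roots, ReachE edges r n) ∧
      (∀ r ∈ roots, ∃ n ∈ nodes, ReachE edges r n) ∧
      solution_alt nodes edges =
        [(nodes.countP (isoP1 edges) : Int) +
           (roots.countP (fun r => decide (c1E edges (compE edges r) = 1)) : Int),
         (nodes.countP (isoP2 edges) : Int) +
           (roots.countP (fun r => decide (c2E edges (compE edges r) = 1)) : Int)] := by
  have hdp0 := dp_fold edges edges [] (PySem.Dict.empty, PySem.Dict.empty) (by simp)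
    (dp_init edges)
  rw [List.nil_append] at hdp0
  obtain ⟨h1, h2, h3, h4, h5, h6, h7, h8⟩ := hdp0
  set dp := edges.foldl stepB (PySem.Dict.empty, PySem.Dict.empty) with hdpdef
  have hclo : ∀ u, dp.2.contains u = true → dp.2.contains (pstep dp.2 u) = true :=
    fun u hu => (h6 u hu).1
  -- the find function
  have hfind : ∀ u, u ∈ Vl edges → RootAbove dp.2 u (findB dp.2 (dp.2.size + 1) u) := by
    intro u hu
    have hc : dp.2.contains u = true := (h5 u).2 hu
    obtain ⟨r, hr⟩ := h7 u hc
    have := findB_rootAbove dp.2 h4 hclo hc hr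
    rw [this]
    exact hr
  have hfC : ∀ u, u ∈ Vl edges → dp.2.contains (findB dp.2 (dp.2.size + 1) u) = true := by
    intro u hu
    obtain ⟨n, hn, _⟩ := hfind u hu
    rw [← hn]
    exact chain_contains dp.2 hclo ((h5 u).2 hu) n
  have hfV : ∀ u, u ∈ Vl edges → findB dp.2 (dp.2.size + 1) u ∈ Vl edges :=
    fun u hu => (h5 _).1 (hfC u hu)
  have hreachF : ∀ u, u ∈ Vl edges → ReachE edges u (findB dp.2 (dp.2.size + 1) u) := by
    intro u hu
    obtain ⟨n, hn, _⟩ := hfind u hu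
    rw [← hn]
    exact rootAbove_reach edges dp.2 h6 ((h5 u).2 hu) n
  have hfixR : ∀ u, u ∈ Vl edges → IsRootP dp.2 (findB dp.2 (dp.2.size + 1) u) := by
    intro u hu
    obtain ⟨n, hn, hr⟩ := hfind u hu
    exact hr
  have hfix : ∀ u, u ∈ Vl edges →
      findB dp.2 (dp.2.size + 1) (findB dp.2 (dp.2.size + 1) u) = findB dp.2 (dp.2.size + 1) u := by
    intro u hu
    exact findB_rootAbove dp.2 h4 hclo (hfC u hu) ⟨0, rfl, hfixR u hu⟩
  have hiff : ∀ u w, u ∈ Vl edges → w ∈ Vl edges →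
      (findB dp.2 (dp.2.size + 1) u = findB dp.2 (dp.2.size + 1) w ↔ ReachE edges u w) := by
    intro u w hu hw
    constructor
    · intro heq
      refine Relation.ReflTransGen.trans (hreachF u hu) ?_
      rw [heq]
      exact reach_symm edges (hreachF w hw)
    · intro hre
      induction hre with
      | refl => rfl
      | @tail z w' hz hstep ihz =>
        have hzV : z ∈ Vl edges := radj_mem_left edges hstep
        have hwV : w' ∈ Vl edges := radj_mem_right edges hstep
        have hcz : dp.2.contains z = true := (h5 z).2 hzV
        have hcw : dp.2.contains w' = true := (h5 w').2 hwV
        have hfzw : findB dp.2 (dp.2.size + 1) z = findB dp.2 (dp.2.size + 1) w' := by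
          rcases hstep with hq | hq
          · obtain ⟨r, hr1, hr2⟩ := h8 (z, w') hq
            rw [findB_rootAbove dp.2 h4 hclo hcz hr1, findB_rootAbove dp.2 h4 hclo hcw hr2]
          · obtain ⟨r, hr1, hr2⟩ := h8 (w', z) hq
            rw [findB_rootAbove dp.2 h4 hclo hcz hr2, findB_rootAbove dp.2 h4 hclo hcw hr1]
        rw [ihz hzV, hfzw]
  -- nodes loop
  obtain ⟨hiso2, hndU, hmemU⟩ := b2_fold edges dp.1 dp.2 h2 nodes ((0, 0), PySem.Set.empty)
    (by simp [PySem.Set.empty])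
  set st2 := nodes.foldl (stepB2 dp.1 dp.2) ((0, 0), PySem.Set.empty) with hst2def
  have hmemU' : ∀ x : Int, x ∈ st2.2 ↔
      (∃ n ∈ nodes, n ∈ Vl edges ∧ x = findB dp.2 (dp.2.size + 1) n) := by
    intro x
    rw [hmemU x]
    simp [PySem.Set.empty]
  -- cnt loop
  have hcond : ∀ v : Int,
      (PySem.Int.mod (dp.1.getD v 0) 2 = PySem.Int.mod v 2) ↔ clsF edges v = true := by
    intro v
    rw [h3 v]
    unfold clsF degF
    rw [beq_iff_eq]
  obtain ⟨hndK, hkeysK, hvalsK⟩ := cnt_fold edges dp.1 dp.2 st2.2 hcond dp.1.keys []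
    PySem.Dict.empty (by simp [PySem.Dict.keys, PySem.Dict.empty])
    (by intro r; simp [PySem.Dict.keys, PySem.Dict.empty])
    (by intro r hr; simp [PySem.Dict.keys, PySem.Dict.empty] at hr)
  rw [List.nil_append] at hkeysK hvalsK
  set cnt := dp.1.keys.foldl (stepC dp.1 dp.2 st2.2) PySem.Dict.empty with hcntdef
  have hkV : ∀ v : Int, v ∈ dp.1.keys ↔ v ∈ Vl edges := by
    intro v
    rw [← PySem.Dict.contains_iff_mem_keys, h2]
  have hKnd : dp.1.keys.Nodup := h1
  -- properties of the roots list cnt.keys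
  have hP1 : ∀ r ∈ cnt.keys, r ∈ Vl edges := by
    intro r hr
    obtain ⟨-, v, hv, hfv⟩ := (hkeysK r).1 hr
    rw [← hfv]
    exact hfV v ((hkV v).1 hv)
  have hroot_of_key : ∀ r ∈ cnt.keys, findB dp.2 (dp.2.size + 1) r = r := by
    intro r hr
    obtain ⟨-, v, hv, hfv⟩ := (hkeysK r).1 hr
    rw [← hfv]
    exact hfix v ((hkV v).1 hv)
  have hP2 : List.Pairwise (fun r s => ¬ ReachE edges r s) cnt.keys := by
    refine List.Pairwise.imp_of_mem ?_ hndK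
    intro r s hr hs hne hre
    apply hne
    have := (hiff r s (hP1 r hr) (hP1 s hs)).2 hre
    rw [hroot_of_key r hr, hroot_of_key s hs] at this
    exact this
  have hP3 : ∀ n ∈ nodes, n ∈ Vl edges → ∃ r ∈ cnt.keys, ReachE edges r n := by
    intro n hn hnV
    refine ⟨findB dp.2 (dp.2.size + 1) n, ?_, reach_symm edges (hreachF n hnV)⟩
    refine (hkeysK _).2 ⟨?_, n, (hkV n).2 hnV, rfl⟩
    exact (hmemU' _).2 ⟨n, hn, hnV, rfl⟩
  have hP4 : ∀ r ∈ cnt.keys, ∃ n ∈ nodes, ReachE edges r n := by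
    intro r hr
    obtain ⟨hu, -⟩ := (hkeysK r).1 hr
    obtain ⟨n, hn, hnV, hxr⟩ := (hmemU' r).1 hu
    exact ⟨n, hn, by rw [hxr]; exact reach_symm edges (hreachF n hnV)⟩
  -- the per-key counts are component counts
  have hfiff : ∀ r ∈ cnt.keys, ∀ x, x ∈ Vl edges →
      (findB dp.2 (dp.2.size + 1) x = r ↔ ReachE edges r x) := by
    intro r hr x hx
    obtain ⟨-, v, hv, hfv⟩ := (hkeysK r).1 hr
    have hvV : v ∈ Vl edges := (hkV v).1 hv
    constructor
    · intro h
      have : ReachE edges x v := (hiff x v hx hvV).1 (by rw [h, hfv])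
      refine Relation.ReflTransGen.trans ?_ (reach_symm edges this)
      rw [← hfv]
      exact reach_symm edges (hreachF v hvV)
    · intro h
      have hrv : ReachE edges x v := by
        refine Relation.ReflTransGen.trans (reach_symm edges h) ?_
        rw [← hfv]
        exact reach_symm edges (hreachF v hvV)
      rw [(hiff x v hx hvV).2 hrv, hfv]
  have hcnt1 : ∀ r ∈ cnt.keys,
      dp.1.keys.countP (fun w => decide (findB dp.2 (dp.2.size + 1) w = r) && clsF edges w) =
        c1E edges (compE edges r) := by
    intro r hr
    rw [List.countP_eq_length_filter,
      filter_length_of_set_eq hKnd (fun x => by rw [hkV x, List.mem_toFinset])]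
    unfold c1E
    congr 1
    apply Finset.ext
    intro x
    rw [Finset.mem_filter, Finset.mem_filter]
    constructor
    · rintro ⟨hxV, hpx⟩
      simp only [Bool.and_eq_true, decide_eq_true_eq] at hpx
      exact ⟨(mem_comp_iff edges).2 ⟨List.mem_toFinset.1 hxV,
        (hfiff r hr x (List.mem_toFinset.1 hxV)).1 hpx.1⟩, hpx.2⟩
    · rintro ⟨hxC, hcl⟩
      obtain ⟨hxV, hre⟩ := (mem_comp_iff edges).1 hxC
      refine ⟨List.mem_toFinset.2 hxV, ?_⟩
      simp only [Bool.and_eq_true, decide_eq_true_eq]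
      exact ⟨(hfiff r hr x hxV).2 hre, hcl⟩
  have hcnt2 : ∀ r ∈ cnt.keys,
      dp.1.keys.countP (fun w => decide (findB dp.2 (dp.2.size + 1) w = r) && !clsF edges w) =
        c2E edges (compE edges r) := by
    intro r hr
    rw [List.countP_eq_length_filter,
      filter_length_of_set_eq hKnd (fun x => by rw [hkV x, List.mem_toFinset])]
    unfold c2E
    congr 1
    apply Finset.ext
    intro x
    rw [Finset.mem_filter, Finset.mem_filter]
    constructor
    · rintro ⟨hxV, hpx⟩
      simp only [Bool.and_eq_true, decide_eq_true_eq, Bool.not_eq_true'] at hpx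
      exact ⟨(mem_comp_iff edges).2 ⟨List.mem_toFinset.1 hxV,
        (hfiff r hr x (List.mem_toFinset.1 hxV)).1 hpx.1⟩, hpx.2⟩
    · rintro ⟨hxC, hcl⟩
      obtain ⟨hxV, hre⟩ := (mem_comp_iff edges).1 hxC
      refine ⟨List.mem_toFinset.2 hxV, ?_⟩
      simp only [Bool.and_eq_true, decide_eq_true_eq, Bool.not_eq_true']
      exact ⟨(hfiff r hr x hxV).2 hre, hcl⟩
  -- assemble the output value
  refine ⟨cnt.keys, hP1, hP2, hP3, hP4, ?_⟩
  rw [solution_alt_unfold]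
  simp only [← hdpdef, ← hst2def, ← hcntdef, values_fold_counts_int]
  have hvmap : cnt.values = cnt.keys.map (fun k => cnt.getD k (0, 0)) :=
    PySem.Dict.values_eq_map_keys cnt hndK (0, 0)
  have hcP1 : cnt.values.countP (fun c => decide (c.1 = 1)) =
      cnt.keys.countP (fun r => decide (c1E edges (compE edges r) = 1)) := by
    rw [hvmap, List.countP_map]
    apply List.countP_congr
    intro r hrk
    show (decide ((cnt.getD r (0, 0)).1 = 1) = true) ↔ _
    rw [hvalsK r hrk]
    simp only [decide_eq_true_eq]
    rw [hcnt1 r hrk]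
    norm_num
  have hcP2 : cnt.values.countP (fun c => decide (c.2 = 1)) =
      cnt.keys.countP (fun r => decide (c2E edges (compE edges r) = 1)) := by
    rw [hvmap, List.countP_map]
    apply List.countP_congr
    intro r hrk
    show (decide ((cnt.getD r (0, 0)).2 = 1) = true) ↔ _
    rw [hvalsK r hrk]
    simp only [decide_eq_true_eq]
    rw [hcnt2 r hrk]
    norm_num
  rw [hcP1, hcP2, hiso2]
  simp

theorem ports_agree (nodes : List Int) (edges : List (List Int)) :
    solution nodes edges = solution_alt nodes edges := by
  obtain ⟨ra, ha1, ha2, ha3, ha4, hAeq⟩ := solution_charA nodes edges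
  obtain ⟨rb, hb1, hb2, hb3, hb4, hBeq⟩ := solution_charB nodes edges
  have hmemchar : ∀ (roots : List Int),
      (∀ r ∈ roots, r ∈ Vl edges) →
      (∀ n ∈ nodes, n ∈ Vl edges → ∃ r ∈ roots, ReachE edges r n) →
      (∀ r ∈ roots, ∃ n ∈ nodes, ReachE edges r n) →
      ∀ C, C ∈ roots.map (compE edges) ↔
        (∃ n ∈ nodes, n ∈ Vl edges ∧ C = compE edges n) := by
    intro roots hV hcov hsrc C
    rw [List.mem_map]
    constructor
    · rintro ⟨r, hr, hC⟩
      obtain ⟨n, hn, hre⟩ := hsrc r hr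
      exact ⟨n, hn, reach_mem edges (hV r hr) hre,
        by rw [← hC, comp_eq_of_reach edges hre]⟩
    · rintro ⟨n, hn, hnV, hC⟩
      obtain ⟨r, hr, hre⟩ := hcov n hn hnV
      exact ⟨r, hr, by rw [hC, comp_eq_of_reach edges hre]⟩
  have hnodup : ∀ (roots : List Int),
      (∀ r ∈ roots, r ∈ Vl edges) →
      List.Pairwise (fun r s => ¬ ReachE edges r s) roots →
      (roots.map (compE edges)).Nodup := by
    intro roots hV hpw
    unfold List.Nodup
    rw [List.pairwise_map]
    refine List.Pairwise.imp_of_mem ?_ hpw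
    intro r s hr hs hnre hCeq
    exact hnre (reach_symm edges (comp_inj edges (hV r hr) hCeq))
  have hperm : (ra.map (compE edges)).Perm (rb.map (compE edges)) := by
    refine (List.perm_ext_iff_of_nodup (hnodup ra ha1 ha2) (hnodup rb hb1 hb2)).2 ?_
    intro C
    rw [hmemchar ra ha1 ha3 ha4 C, hmemchar rb hb1 hb3 hb4 C]
  have hcount : ∀ p : Finset Int → Bool,
      ra.countP (fun r => p (compE edges r)) = rb.countP (fun r => p (compE edges r)) := by
    intro p
    have := hperm.countP_eq p
    rw [List.countP_map, List.countP_map] at this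
    exact this
  rw [hAeq, hBeq]
  rw [hcount (fun C => decide (c1E edges C = 1)), hcount (fun C => decide (c2E edges C = 1))]

-- ===== VERDICT (by name: the statement is the Claim_ definition above) =====
theorem solution_spec : Claim_equal_solution := by
  intro nodes edges _ _
  unfold Spec_solution
  exact ports_agree nodes edges
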